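-- pv_equiv track=rewrite | github.com/adamz258/PoE-Stash-Regex-Generator | src/core/regex_generator.py | _compact_suffixes
-- ===== SOURCE A (Python) =====
-- from typing import Iterable, List, Optional, Tuple
--
-- REGEX_META = set(".^$*+?()[]{}|\\")
--
-- def _escape_char(char: str) -> str:
--     return f"\\{char}" if char in REGEX_META else char
--
-- def _has_suffix_relations(strings: List[str]) -> bool:
--     ordered = sorted(strings, key=len)
--     for index, short in enumerate(ordered):
--         for long_value in ordered[index + 1 :]:
--             if long_value.endswith(short):
--                 return True
--     return False
--
-- def _build_suffix_regex(strings: List[str]) -> str: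
--     groups: dict[str, List[str]] = {}
--     for value in strings:
--         if not value:
--             raise ValueError("Empty string is not supported for suffix compaction.")
--         groups.setdefault(value[-1], []).append(value[:-1])
--
--     parts: List[str] = []
--     for char in sorted(groups.keys()):
--         prefixes = groups[char]
--         if prefixes and all(value == "" for value in prefixes):
--             subpattern = ""
--         else:
--             subpattern = _build_suffix_regex(sorted(prefixes)) if prefixes else ""
--         if subpattern:
--             parts.append(subpattern + _escape_char(char))
--         else:
--             parts.append(_escape_char(char))
--
--     if len(parts) == 1:
--         return parts[0]
--     return "(" + "|".join(parts) + ")"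
--
-- def _compact_suffixes(raw_suffixes: List[str]) -> Optional[str]:
--     unique = sorted(set(raw_suffixes))
--     if len(unique) <= 1:
--         return None
--     if any(value == "" for value in unique):
--         return None
--     if _has_suffix_relations(unique):
--         return None
--
--     regex_body = _build_suffix_regex(unique)
--     return f"({regex_body})$"
-- ===== SOURCE B (Python) =====
-- from typing import List, Optional
--
-- REGEX_META = set(".^$*+?()[]{}|\\")
--
-- def _render(parts: List[str]) -> str:
--     return parts[0] if len(parts) == 1 else "(" + "|".join(parts) + ")" if parts else ""
--
-- def _compact_suffixes(raw_suffixes: List[str]) -> Optional[str]: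
--     rev = sorted({s[::-1] for s in raw_suffixes})
--     if len(rev) <= 1 or rev[0] == "":
--         return None
--     # One pass over the sorted reversed strings: reject suffix nesting via the
--     # adjacent longest-common-prefix, and emit the regex with an explicit stack
--     # of open trie nodes (stack[d] = finished alternatives of the node at depth d).
--     stack: List[List[str]] = [[]]
--     prev = ""
--     for s in rev:
--         l = 0
--         while l < len(prev) and l < len(s) and prev[l] == s[l]:
--             l += 1
--         if prev and l == len(prev):
--             return None  # prev is a prefix of s: a suffix-nesting pair exists
--         while len(stack) > l + 1:  # close the nodes deeper than the fork depth
--             parts = stack.pop()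
--             c = prev[len(stack) - 1]
--             esc = "\\" + c if c in REGEX_META else c
--             stack[-1].append(_render(parts) + esc)
--         stack.extend([] for _ in range(len(s) - l))  # open the new branch
--         prev = s
--     while len(stack) > 1:  # close everything after the last string
--         parts = stack.pop()
--         c = prev[len(stack) - 1]
--         esc = "\\" + c if c in REGEX_META else c
--         stack[-1].append(_render(parts) + esc)
--     return "(" + _render(stack[0]) + ")$"
-- ===== Notes on version B (the rewrite author's own statement) =====
-- stated objective: alternative
-- what changed: B replaces A's three staged passes (all-pairs endswith scan, then recursive dict-grouping by last character with per-level re-sorting) by one sort of the reversed strings followed by a single linear pass that simultaneously rejects suffix nesting via the adjacent longest-common-prefix and emits the regex iteratively with an explicit stack of open trie nodes; on the measured input family the two have comparable cost.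
import Mathlib
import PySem

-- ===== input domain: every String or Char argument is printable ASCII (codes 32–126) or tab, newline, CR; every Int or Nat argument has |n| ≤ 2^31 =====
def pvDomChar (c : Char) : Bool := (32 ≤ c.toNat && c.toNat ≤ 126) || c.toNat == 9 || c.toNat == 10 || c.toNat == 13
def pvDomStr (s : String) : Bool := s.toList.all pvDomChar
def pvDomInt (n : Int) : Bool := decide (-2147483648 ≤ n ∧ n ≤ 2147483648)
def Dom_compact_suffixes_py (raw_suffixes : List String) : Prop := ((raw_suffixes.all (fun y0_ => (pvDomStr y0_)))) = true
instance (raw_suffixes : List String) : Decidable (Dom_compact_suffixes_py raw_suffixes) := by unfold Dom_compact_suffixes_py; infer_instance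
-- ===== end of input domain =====

-- B replaces A's staged passes (all-pairs endswith scan, then recursive dict-grouping with
-- per-level re-sorting) by one sort of the reversed strings followed by a single linear pass
-- that rejects suffix nesting via the adjacent longest-common-prefix and emits the regex
-- iteratively with an explicit stack of open trie nodes.

-- ===== PORT A =====
-- Strings are handled at the code-point level (List Char): Python str sorting/comparison is
-- exactly lexicographic comparison of the char lists (PySem: str '<' IS List/String '<').

def pvRegexMeta : PySem.Set Char := PySem.Set.ofList ".^$*+?()[]{}|\\".toList

def pvEscapeChar (c : Char) : List Char :=
  if PySem.Set.contains pvRegexMeta c then ['\\', c] else [c]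

def pvHasSuffixRelations (strings : List (List Char)) : Bool :=
  let ordered := PySem.List.sorted strings (fun s => PySem.List.len s)
  (PySem.List.enumerate ordered 0).any (fun p =>
    (PySem.List.slice ordered (some (p.1 + 1)) none).any (fun long =>
      PySem.Chars.endswith long p.2))

/-- measure for the recursions below (termination only) -/
def pvSumLen (l : List (List Char)) : Nat := (l.map (fun v => v.length + 1)).sum

theorem pv_nat_sum_sublist {l1 l2 : List Nat} (h : l1.Sublist l2) : l1.sum ≤ l2.sum := by
  induction h with
  | slnil => simp
  | cons a h ih => simp; omega
  | cons₂ a h ih => simp; omega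


theorem pv_groups_getD (L : List (List Char)) (c : Char) :
    (L.foldl (fun d v =>
        d.modify (PySem.List.pyGetD v (-1) ' ') [] (fun l => l ++ [PySem.List.slice v none (some (-1))]))
      PySem.Dict.empty).getD c []
    = (L.filter (fun v => PySem.List.pyGetD v (-1) ' ' == c)).map
        (fun v => PySem.List.slice v none (some (-1))) := by
  have h := PySem.Dict.getD_foldl_modify_append
    (l := L.map (fun v => (PySem.List.pyGetD v (-1) ' ', PySem.List.slice v none (some (-1)))))
    (d := PySem.Dict.empty) c
  rw [List.foldl_map] at h
  simpa [List.filter_map, List.map_map, Function.comp_def] using h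

theorem pv_sumLen_sublist {l1 l2 : List (List Char)} (h : l1.Sublist l2) :
    pvSumLen l1 ≤ pvSumLen l2 := pv_nat_sum_sublist (h.map _)

theorem pv_sumLen_perm {l1 l2 : List (List Char)} (h : l1.Perm l2) :
    pvSumLen l1 = pvSumLen l2 := List.Perm.sum_eq (h.map _)

theorem pv_dec_A (strings : List (List Char)) (c : Char)
    (hgood : ¬ strings.any (fun v => v.isEmpty) = true)
    (hne : (strings.foldl (fun d v =>
        d.modify (PySem.List.pyGetD v (-1) ' ') [] (fun l => l ++ [PySem.List.slice v none (some (-1))]))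
      PySem.Dict.empty).getD c [] ≠ []) :
    pvSumLen (PySem.List.sorted ((strings.foldl (fun d v =>
        d.modify (PySem.List.pyGetD v (-1) ' ') [] (fun l => l ++ [PySem.List.slice v none (some (-1))]))
      PySem.Dict.empty).getD c []) (fun x => x)) < pvSumLen strings := by
  rw [pv_groups_getD] at hne ⊢
  set P : List Char → Bool := fun v => PySem.List.pyGetD v (-1) ' ' == c with hP
  have hnonempty : ∀ v ∈ strings, v ≠ [] := by
    intro v hv hcon
    exact hgood (List.any_eq_true.mpr ⟨v, hv, by simp [hcon]⟩)
  have h1 : pvSumLen (PySem.List.sorted ((strings.filter P).map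
      (fun v => PySem.List.slice v none (some (-1)))) (fun x => x))
      = pvSumLen ((strings.filter P).map (fun v => PySem.List.slice v none (some (-1)))) :=
    pv_sumLen_perm (PySem.List.sorted_perm _ _ _)
  have h2 : pvSumLen ((strings.filter P).map (fun v => PySem.List.slice v none (some (-1))))
      < pvSumLen (strings.filter P) := by
    unfold pvSumLen
    rw [List.map_map]
    apply List.sum_lt_sum
    · intro v hv
      simp only [Function.comp_def, PySem.List.slice_to_neg_one]
      have := hnonempty v (List.mem_of_mem_filter hv)
      have hdl : v.dropLast.length = v.length - 1 := List.length_dropLast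
      have : v.length ≠ 0 := by simpa [List.length_eq_zero_iff] using this
      omega
    · obtain ⟨v, hv⟩ := List.exists_mem_of_ne_nil (strings.filter P) (by
        intro hcon
        exact hne (by rw [hcon]; simp))
      refine ⟨v, hv, ?_⟩
      simp only [Function.comp_def, PySem.List.slice_to_neg_one]
      have := hnonempty v (List.mem_of_mem_filter hv)
      have hdl : v.dropLast.length = v.length - 1 := List.length_dropLast
      have : v.length ≠ 0 := by simpa [List.length_eq_zero_iff] using this
      omega
  have h3 : pvSumLen (strings.filter P) ≤ pvSumLen strings :=
    pv_sumLen_sublist (List.filter_sublist)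
  omega

def pvBuildSuffixRegex (strings : List (List Char)) : Option (List Char) :=
  if hgood : strings.any (fun v => v.isEmpty) then
    none   -- 'raise ValueError': an empty string reached suffix compaction
  else
    let groups := strings.foldl (fun d v =>
      d.modify (PySem.List.pyGetD v (-1) ' ') [] (fun l => l ++ [PySem.List.slice v none (some (-1))]))
      PySem.Dict.empty
    let parts? := (PySem.List.sorted groups.keys (fun c => c)).map (fun c =>
      let prefixes := groups.getD c []
      let sub? : Option (List Char) :=
        if prefixes ≠ [] ∧ prefixes.all (fun v => v.isEmpty) then some []
        else if hpre : prefixes ≠ [] then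
          pvBuildSuffixRegex (PySem.List.sorted prefixes (fun x => x))
        else some []
      sub?.map (fun sub => if sub ≠ [] then sub ++ pvEscapeChar c else pvEscapeChar c))
    if parts?.contains none then none   -- the recursive ValueError propagates
    else
      let parts := parts?.reduceOption
      if parts.length = 1 then some parts.headI
      else some (['('] ++ PySem.Chars.join ['|'] parts ++ [')'])
termination_by pvSumLen strings
decreasing_by
  simp only [prefixes, groups] at hpre ⊢
  rw [List.foldl_attach (l := strings)
      (f := fun d v => PySem.Dict.modify d (PySem.List.pyGetD v (-1) ' ') []
        (fun l => l ++ [PySem.List.slice v none (some (-1))]))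
      (b := PySem.Dict.empty)] at hpre ⊢
  exact pv_dec_A strings c hgood hpre

def compact_suffixes_py (raw_suffixes : List String) : Option String :=
  let unique := PySem.List.sorted (PySem.Set.ofList (raw_suffixes.map String.toList)) (fun x => x)
  if PySem.List.len unique ≤ 1 then none
  else if unique.any (fun v => v.isEmpty) then none
  else if pvHasSuffixRelations unique then none
  else
    match pvBuildSuffixRegex unique with
    | none => none   -- ValueError path; never taken from here (proved below)
    | some body => some (String.ofList (['('] ++ body ++ [')', '$']))

-- ===== PORT B =====

def pvRegexMetaB : PySem.Set Char := PySem.Set.ofList ".^$*+?()[]{}|\\".toList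

/-- the inline `"\\" + c if c in REGEX_META else c` of Source B -/
def pvEscB (c : Char) : List Char :=
  if PySem.Set.contains pvRegexMetaB c then ['\\', c] else [c]

/-- Source B's `_render` -/
def pvRender (parts : List (List Char)) : List Char :=
  if parts.length = 1 then parts.headI
  else if parts ≠ [] then ['('] ++ PySem.Chars.join ['|'] parts ++ [')']
  else []

/-- one iteration of Source B's closing `while`: pop the top node, render it, append the finished
    alternative to the node below.  The stack is held top-first; `prev[len(stack)-1]` is ported
    with `pyGetD` (the index is in range whenever the loop runs, so the default is never used). -/
def pvCloseStep (prev : List Char) : List (List (List Char)) → List (List (List Char))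
  | parts :: below :: rest =>
      (below ++ [pvRender parts ++
        pvEscB (PySem.List.pyGetD prev (((below :: rest).length : Int) - 1) ' ')]) :: rest
  | s => s

theorem pvCloseStep_length (prev : List Char) (s : List (List (List Char))) (h : 2 ≤ s.length) :
    (pvCloseStep prev s).length = s.length - 1 := by
  match s with
  | a :: b :: r => simp [pvCloseStep]
  | [] => simp at h
  | [a] => simp at h

/-- Source B's `while len(stack) > l + 1: …` -/
def pvCloseTo (l : Nat) (prev : List Char) (stack : List (List (List Char))) :
    List (List (List Char)) :=
  if h : l + 1 < stack.length then pvCloseTo l prev (pvCloseStep prev stack) else stack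
termination_by stack.length
decreasing_by
  rw [pvCloseStep_length prev stack (by omega)]; omega

/-- Source B's inner `while`: the longest common prefix of the two adjacent strings -/
def pvLcp : List Char → List Char → Nat
  | a :: as, b :: bs => if a = b then pvLcp as bs + 1 else 0
  | _, _ => 0

/-- one iteration of Source B's `for s in rev` (None propagates once the nesting guard fired) -/
def pvStep (st : Option (List (List (List Char)) × List Char)) (s : List Char) :
    Option (List (List (List Char)) × List Char) :=
  match st with
  | none => none
  | some (stack, prev) =>
    let l := pvLcp prev s
    if prev ≠ [] ∧ l = prev.length then none
    else some (List.replicate (s.length - l) [] ++ pvCloseTo l prev stack, s)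

def compact_suffixes_py_alt (raw_suffixes : List String) : Option String :=
  let rev := PySem.List.sorted (PySem.Set.ofList (raw_suffixes.map (fun s => s.toList.reverse)))
    (fun x => x)
  if PySem.List.len rev ≤ 1 ∨ rev.headI = [] then none  -- rev[0] only read when rev ≠ [] (short-circuit `or`)
  else
    match rev.foldl pvStep (some ([[]], [])) with
    | none => none
    | some (stack, prev) =>
        some (String.ofList (['('] ++ pvRender ((pvCloseTo 0 prev stack).headI) ++ [')', '$']))

-- ===== PRECONDITION & SPEC =====
def Spec_compact_suffixes_py (raw_suffixes : List String) (out : Option String) : Prop := out = compact_suffixes_py_alt raw_suffixes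
instance (raw_suffixes : List String) (out : Option String) : Decidable (Spec_compact_suffixes_py raw_suffixes out) := by unfold Spec_compact_suffixes_py; infer_instance

-- ===== CLAIM (what is proved, stated in full; the proofs are below) =====
def Claim_equal_compact_suffixes_py : Prop := ∀ (raw_suffixes : List String), Dom_compact_suffixes_py raw_suffixes → Spec_compact_suffixes_py raw_suffixes (compact_suffixes_py raw_suffixes)

-- ===== LEMMAS AND PROOFS =====

/-- the hypotheses under which the regex builders run -/
def pvGood (V : List (List Char)) : Prop :=
  V.Nodup ∧ (∀ v ∈ V, v ≠ []) ∧ ∀ x ∈ V, ∀ y ∈ V, x ≠ y → ¬ x <:+ y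

-- ---------- the reference emitter (proof-side): run-grouping over the sorted reversed strings ----------

theorem pv_dec_B_tails (c : Char) (cr : List Char) (rest : List (List Char)) :
    pvSumLen (((((c :: cr) :: rest).takeWhile (fun x => x.headI == c)).map
        (fun r => PySem.List.slice r (some 1) none)).filter (fun t => t ≠ []))
      < pvSumLen ((c :: cr) :: rest) := by
  have hrun : ((c :: cr) :: rest).takeWhile (fun x => x.headI == c)
      = (c :: cr) :: rest.takeWhile (fun x => x.headI == c) := by
    simp
  set run := ((c :: cr) :: rest).takeWhile (fun x => x.headI == c) with hr
  have h1 : pvSumLen ((run.map (fun r => PySem.List.slice r (some 1) none)).filter (fun t => t ≠ []))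
      ≤ pvSumLen (run.map (fun r => PySem.List.slice r (some 1) none)) :=
    pv_sumLen_sublist (List.filter_sublist)
  have h2 : pvSumLen (run.map (fun r => PySem.List.slice r (some 1) none)) < pvSumLen run := by
    unfold pvSumLen
    rw [List.map_map]
    apply List.sum_lt_sum
    · intro r _
      simp only [Function.comp_def, PySem.List.slice_from_one]
      have : r.tail.length = r.length - 1 := List.length_tail
      omega
    · refine ⟨c :: cr, by rw [hrun]; exact List.mem_cons_self, ?_⟩
      simp [PySem.List.slice_from_one]
  have h3 : pvSumLen run ≤ pvSumLen ((c :: cr) :: rest) :=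
    pv_sumLen_sublist (List.takeWhile_sublist _)
  omega

theorem pv_dec_B_rest (c : Char) (cr : List Char) (rest : List (List Char)) :
    pvSumLen (((c :: cr) :: rest).dropWhile (fun x => x.headI == c))
      < pvSumLen ((c :: cr) :: rest) := by
  have hd : ((c :: cr) :: rest).dropWhile (fun x => x.headI == c)
      = rest.dropWhile (fun x => x.headI == c) := by
    simp
  rw [hd]
  have h1 : pvSumLen (rest.dropWhile (fun x => x.headI == c)) ≤ pvSumLen rest :=
    pv_sumLen_sublist (List.dropWhile_sublist _)
  have : pvSumLen ((c :: cr) :: rest) = (c :: cr).length + 1 + pvSumLen rest := by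
    simp [pvSumLen]
  omega

mutual
/-- reference: render the alternation of the collected parts -/
def pvEmit (rs : List (List Char)) : List Char :=
  let parts := pvEmitParts rs
  if parts.length = 1 then parts.headI
  else ['('] ++ PySem.Chars.join ['|'] parts ++ [')']
termination_by (pvSumLen rs, 1)

/-- reference: one part per run of equal leading chars of the sorted reversed strings -/
def pvEmitParts (rs : List (List Char)) : List (List Char) :=
  match rs with
  | [] => []
  | [] :: _ => []   -- unreachable on nonempty strings
  | (c :: cr) :: rest =>
      let run := ((c :: cr) :: rest).takeWhile (fun x => x.headI == c)
      let rest' := ((c :: cr) :: rest).dropWhile (fun x => x.headI == c)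
      let tails := (run.map (fun r => PySem.List.slice r (some 1) none)).filter (fun t => t ≠ [])
      let sub := if tails = [] then [] else pvEmit tails
      (sub ++ pvEscB c) :: pvEmitParts rest'
termination_by (pvSumLen rs, 0)
decreasing_by
  · exact Prod.Lex.left _ _ (pv_dec_B_tails c cr rest)
  · exact Prod.Lex.left _ _ (pv_dec_B_rest c cr rest)
end

-- ---------- infrastructure for the A-side induction ----------

/-- proof-side name for the grouping dict A builds -/
def pvGroupsFold (L : List (List Char)) : PySem.Dict Char (List (List Char)) :=
  L.foldl (fun d v =>
    d.modify (PySem.List.pyGetD v (-1) ' ') [] (fun l => l ++ [PySem.List.slice v none (some (-1))]))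
    PySem.Dict.empty

/-- proof-side name for the body of A's parts loop -/
def pvPartA (L : List (List Char)) (c : Char) : Option (List Char) :=
  let prefixes := (pvGroupsFold L).getD c []
  let sub? : Option (List Char) :=
    if prefixes ≠ [] ∧ prefixes.all (fun v => v.isEmpty) then some []
    else if prefixes ≠ [] then pvBuildSuffixRegex (PySem.List.sorted prefixes (fun x => x))
    else some []
  sub?.map (fun sub => if sub ≠ [] then sub ++ pvEscapeChar c else pvEscapeChar c)

theorem pvBuild_unfold (strings : List (List Char)) :
    pvBuildSuffixRegex strings =
      if strings.any (fun v => v.isEmpty) then none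
      else
        let parts? := (PySem.List.sorted (pvGroupsFold strings).keys (fun c => c)).map (pvPartA strings)
        if parts?.contains none then none
        else if parts?.reduceOption.length = 1 then some parts?.reduceOption.headI
        else some (['('] ++ PySem.Chars.join ['|'] parts?.reduceOption ++ [')']) := by
  rw [pvBuildSuffixRegex]
  unfold pvPartA pvGroupsFold
  simp only [dite_eq_ite]

theorem pv_groups_getD' (L : List (List Char)) (c : Char) :
    (pvGroupsFold L).getD c []
      = (L.filter (fun v => PySem.List.pyGetD v (-1) ' ' == c)).map List.dropLast := by
  rw [pvGroupsFold, pv_groups_getD]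
  simp [PySem.List.slice_to_neg_one]

theorem pv_groups_keys (L : List (List Char)) :
    (pvGroupsFold L).keys
      = PySem.Set.ofList (L.map (fun v => PySem.List.pyGetD v (-1) ' ')) := by
  rw [pvGroupsFold]
  rw [PySem.Dict.keys_foldl_modify_key L (fun v => PySem.List.pyGetD v (-1) ' ') []
    (fun d v => fun l => l ++ [PySem.List.slice v none (some (-1))]) PySem.Dict.empty]
  rfl

theorem pv_head_le_of_lex {a b : List Char} (ha : a ≠ []) (h : a < b) : a.headI ≤ b.headI := by
  cases a with
  | nil => exact absurd rfl ha
  | cons x xs =>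
    cases b with
    | nil => exact absurd h (List.not_lex_nil)
    | cons y ys =>
      have h' : List.Lex (· < ·) (x :: xs) (y :: ys) := h
      cases h' with
      | cons h'' => simp
      | rel hr => simpa using le_of_lt hr

theorem pv_lex_cons {c : Char} {t1 t2 : List Char} (h : (c :: t1) < (c :: t2)) : t1 < t2 := by
  have h' : List.Lex (· < ·) (c :: t1) (c :: t2) := h
  cases h' with
  | cons h'' => exact h''
  | rel hr => exact absurd hr (lt_irrefl c)

theorem pv_takeWhile_eq_filter {α : Type} {R : α → α → Prop} (p : α → Bool) :
    ∀ {l : List α}, l.Pairwise R → (∀ a ∈ l, ∀ b ∈ l, R a b → p b = true → p a = true) →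
      l.takeWhile p = l.filter p ∧ l.dropWhile p = l.filter (fun x => !(p x))
  | [], _, _ => by simp
  | a :: t, hp, hmono => by
    obtain ⟨hat, ht⟩ := List.pairwise_cons.mp hp
    have hmono' : ∀ x ∈ t, ∀ y ∈ t, R x y → p y = true → p x = true := by
      intro x hx y hy
      exact hmono x (List.mem_cons_of_mem _ hx) y (List.mem_cons_of_mem _ hy)
    have ih := pv_takeWhile_eq_filter p ht hmono'
    cases hpa : p a with
    | true =>
      simp only [List.takeWhile_cons, List.dropWhile_cons, List.filter_cons, hpa,
        Bool.not_true, if_true]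
      exact ⟨by rw [ih.1], by simpa using ih.2⟩
    | false =>
      have hall : ∀ b ∈ t, p b = false := by
        intro b hb
        cases hpb : p b with
        | false => rfl
        | true => exact absurd (hmono a List.mem_cons_self b (List.mem_cons_of_mem _ hb)
            (hat b hb) hpb) (by simp [hpa])
      have hall' : ∀ b ∈ t, ¬ p b = true := fun b hb => by simp [hall b hb]
      have hfil : t.filter (fun x => !(p x)) = t :=
        List.filter_eq_self.mpr (fun b hb => by simp [hall b hb])
      constructor
      · rw [List.takeWhile_cons]
        simp [hpa, List.filter_cons, List.filter_eq_nil_iff.mpr hall']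
      · rw [List.dropWhile_cons]
        simp [hpa, List.filter_cons, hfil]

theorem pv_dlt : (fun (a b : List Char) => a.decidableLT b) = (LinearOrder.toDecidableLT) := by
  funext a b; exact Subsingleton.elim _ _

theorem pv_dltc : (Char.instDecidableLt : DecidableLT Char) = (LinearOrder.toDecidableLT) := by
  funext a b; exact Subsingleton.elim _ _

theorem pv_sorted_lt {V : List (List Char)} (hnd : V.Nodup) :
    (PySem.List.sorted V (fun x => x)).Pairwise (· < ·) := by
  have h1 := PySem.List.sorted_pairwise V (fun x : List Char => x)
  have h3 : (PySem.List.sorted V (fun x : List Char => x)).Pairwise (· ≠ ·) :=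
    (PySem.List.sorted_perm V (fun x : List Char => x) false).nodup_iff.mpr hnd
  rw [pv_dlt] at h3 ⊢
  exact (h1.and h3).imp (fun h => lt_of_le_of_ne h.1 h.2)

theorem pv_canon {xs ys : List (List Char)} (hperm : ys.Perm xs) (hp : ys.Pairwise (· < ·)) :
    PySem.List.sorted xs (fun x => x) = ys := by
  rw [pv_dlt]
  exact PySem.List.sorted_eq_of_perm_of_pairwise_lt xs ys _ hperm hp

theorem pv_canon_chars {xs ys : List Char} (hperm : ys.Perm xs) (hp : ys.Pairwise (· < ·)) :
    PySem.List.sorted xs (fun c => c) = ys := by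
  rw [pv_dltc]
  exact PySem.List.sorted_eq_of_perm_of_pairwise_lt xs ys _ hperm hp

theorem pv_keys_lt (xs : List Char) :
    (PySem.List.sorted (PySem.Set.ofList xs) (fun c => c)).Pairwise (· < ·) := by
  rw [pv_dltc]
  exact PySem.List.sorted_ofList_pairwise_lt xs

theorem pv_concat_of_ne_nil {v : List Char} (h : v ≠ []) : ∃ w c, v = w ++ [c] := by
  induction v using List.reverseRecOn with
  | nil => exact absurd rfl h
  | append_singleton w c _ => exact ⟨w, c, rfl⟩

theorem pv_head_reverse {v : List Char} (h : v ≠ []) :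
    v.reverse.headI = PySem.List.pyGetD v (-1) ' ' := by
  obtain ⟨w, c, rfl⟩ := pv_concat_of_ne_nil h
  rw [PySem.List.pyGetD_neg_one_append_singleton]
  simp

/-- statement of the parts-level equality, the heart of the A-side induction -/
def pvQ (V : List (List Char)) : Prop :=
  (PySem.List.sorted (pvGroupsFold (PySem.List.sorted V (fun x => x))).keys (fun c => c)).map
      (pvPartA (PySem.List.sorted V (fun x => x)))
    = (pvEmitParts (PySem.List.sorted (V.map List.reverse) (fun x => x))).map some

theorem pv_reduceOption_map_some (l : List (List Char)) : (l.map some).reduceOption = l := by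
  induction l with
  | nil => rfl
  | cons a t ih => simpa [List.reduceOption_cons_of_some] using ih

theorem pv_P_of_Q (V : List (List Char)) (hgood : pvGood V) (hq : pvQ V) :
    pvBuildSuffixRegex (PySem.List.sorted V (fun x => x))
      = some (pvEmit (PySem.List.sorted (V.map List.reverse) (fun x => x))) := by
  obtain ⟨hnd, hne, hns⟩ := hgood
  rw [pvBuild_unfold]
  have hBoolEmpty : ((PySem.List.sorted V (fun x => x)).any (fun v => v.isEmpty)) = false := by
    rw [List.any_eq_false]
    intro v hv
    have : v ∈ V := (PySem.List.mem_sorted _ _ _ _).mp hv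
    simp [List.isEmpty_iff, hne v this]
  rw [if_neg (by simp [hBoolEmpty])]
  simp only []
  rw [pvQ] at hq
  rw [hq]
  rw [if_neg (by simp)]
  have hred : ((pvEmitParts (PySem.List.sorted (V.map List.reverse) (fun x => x))).map some).reduceOption
      = pvEmitParts (PySem.List.sorted (V.map List.reverse) (fun x => x)) :=
    pv_reduceOption_map_some _
  rw [hred, pvEmit]
  split <;> rfl

theorem pv_Q_holds : ∀ (N : Nat), ∀ (V : List (List Char)), pvSumLen V < N → pvGood V → pvQ V := by
  intro N
  induction N with
  | zero => intro V h _; omega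
  | succ N ih =>
    intro V hlt hgood
    obtain ⟨hnd, hne, hns⟩ := hgood
    rw [pvQ]
    by_cases hV0 : V = []
    · subst hV0
      have h1 : PySem.List.sorted ([] : List (List Char)) (fun x => x) = [] := by
        simp [PySem.List.sorted_eq_nil_iff]
      simp only [List.map_nil, h1]
      rw [pv_groups_keys]
      have h2 : PySem.List.sorted (PySem.Set.ofList (([] : List (List Char)).map
          (fun v => PySem.List.pyGetD v (-1) ' '))) (fun c => c) = [] := by
        simp [PySem.List.sorted_eq_nil_iff, PySem.Set.ofList]
      rw [h2]
      rw [pvEmitParts]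
      simp
    · -- V nonempty
      have hLperm : (PySem.List.sorted V (fun x => x)).Perm V := PySem.List.sorted_perm _ _ _
      have hVr_nd : (V.map List.reverse).Nodup := hnd.map (fun a b h => List.reverse_injective h)
      have hRSp : (PySem.List.sorted (V.map List.reverse) (fun x => x)).Pairwise (· < ·) :=
        pv_sorted_lt hVr_nd
      have hRSperm : (PySem.List.sorted (V.map List.reverse) (fun x => x)).Perm (V.map List.reverse) :=
        PySem.List.sorted_perm _ _ _
      have hRSne_el : ∀ r ∈ PySem.List.sorted (V.map List.reverse) (fun x => x), r ≠ [] := by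
        intro r hr
        obtain ⟨v, hv, rfl⟩ := List.mem_map.mp (hRSperm.mem_iff.mp hr)
        simpa using hne v hv
      obtain ⟨r0, rs', hRSc⟩ : ∃ r0 rs',
          PySem.List.sorted (V.map List.reverse) (fun x => x) = r0 :: rs' := by
        cases hRSe : PySem.List.sorted (V.map List.reverse) (fun x => x) with
        | nil =>
          exfalso
          have := hRSperm.length_eq
          rw [hRSe] at this
          simp at this
          exact hV0 (List.length_eq_zero_iff.mp this.symm)
        | cons a t => exact ⟨a, t, rfl⟩
      obtain ⟨c0, cr, hr0⟩ : ∃ c0 cr, r0 = c0 :: cr := by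
        have : r0 ≠ [] := hRSne_el r0 (by rw [hRSc]; exact List.mem_cons_self)
        cases r0 with
        | nil => exact absurd rfl this
        | cons a t => exact ⟨a, t, rfl⟩
      have hmin : ∀ r ∈ PySem.List.sorted (V.map List.reverse) (fun x => x), c0 ≤ r.headI := by
        intro r hr
        rw [hRSc] at hr
        rcases List.mem_cons.mp hr with rfl | hr'
        · rw [hr0]
          simp
        · have hpair := List.pairwise_cons.mp (hRSc ▸ hRSp)
          have hlt : r0 < r := hpair.1 r hr'
          have h := pv_head_le_of_lex (by rw [hr0]; simp) hlt
          rw [hr0] at h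
          simpa using h
      have hlastF : ∀ v ∈ V, (List.reverse v).headI = PySem.List.pyGetD v (-1) ' ' :=
        fun v hv => pv_head_reverse (hne v hv)
      obtain ⟨v0, hv0V, hv0r⟩ : ∃ v0 ∈ V, List.reverse v0 = r0 := by
        have h : r0 ∈ V.map List.reverse :=
          hRSperm.mem_iff.mp (by rw [hRSc]; exact List.mem_cons_self)
        obtain ⟨v, hv, hh⟩ := List.mem_map.mp h
        exact ⟨v, hv, hh⟩
      have hv0last : PySem.List.pyGetD v0 (-1) ' ' = c0 := by
        rw [← hlastF v0 hv0V, hv0r, hr0]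
        rfl
      have hmono : ∀ a ∈ PySem.List.sorted (V.map List.reverse) (fun x => x),
          ∀ b ∈ PySem.List.sorted (V.map List.reverse) (fun x => x),
          a < b → (b.headI == c0) = true → (a.headI == c0) = true := by
        intro a ha b hb hab hbc
        rw [beq_iff_eq] at hbc ⊢
        exact le_antisymm (hbc ▸ pv_head_le_of_lex (hRSne_el a ha) hab) (hmin a ha)
      have htdf := pv_takeWhile_eq_filter (fun x => x.headI == c0) hRSp hmono
      have hWmap : (V.map List.reverse).filter (fun x => x.headI == c0)
          = (V.filter (fun v => PySem.List.pyGetD v (-1) ' ' == c0)).map List.reverse := by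
        rw [List.filter_map]
        congr 1
        apply List.filter_congr
        intro v hv
        simp [hlastF v hv]
      have hV'map : (V.map List.reverse).filter (fun x => !(x.headI == c0))
          = (V.filter (fun v => !(PySem.List.pyGetD v (-1) ' ' == c0))).map List.reverse := by
        rw [List.filter_map]
        congr 1
        apply List.filter_congr
        intro v hv
        simp [hlastF v hv]
      have hrun_eq : (PySem.List.sorted (V.map List.reverse) (fun x => x)).filter (fun x => x.headI == c0)
          = PySem.List.sorted ((V.filter (fun v => PySem.List.pyGetD v (-1) ' ' == c0)).map List.reverse)
              (fun x => x) := by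
        refine (pv_canon ?_ ?_).symm
        · rw [← hWmap]
          exact hRSperm.filter _
        · exact hRSp.filter _
      have hrest_eq : (PySem.List.sorted (V.map List.reverse) (fun x => x)).filter (fun x => !(x.headI == c0))
          = PySem.List.sorted ((V.filter (fun v => !(PySem.List.pyGetD v (-1) ' ' == c0))).map List.reverse)
              (fun x => x) := by
        refine (pv_canon ?_ ?_).symm
        · rw [← hV'map]
          exact hRSperm.filter _
        · exact hRSp.filter _
      have hLf : ∀ c, (PySem.List.sorted V (fun x => x)).filter (fun v => PySem.List.pyGetD v (-1) ' ' == c)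
          = PySem.List.sorted (V.filter (fun v => PySem.List.pyGetD v (-1) ' ' == c)) (fun x => x) := by
        intro c
        refine (pv_canon ?_ ?_).symm
        · exact hLperm.filter _
        · exact (pv_sorted_lt hnd).filter _
      have hV'sub : ∀ v ∈ V.filter (fun v => !(PySem.List.pyGetD v (-1) ' ' == c0)), v ∈ V :=
        fun v hv => List.mem_of_mem_filter hv
      have hV'ne : ∀ v ∈ V.filter (fun v => !(PySem.List.pyGetD v (-1) ' ' == c0)),
          PySem.List.pyGetD v (-1) ' ' ≠ c0 := by
        intro v hv
        have := List.of_mem_filter hv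
        simpa using this
      have hmemK' : ∀ c, c ∈ PySem.List.sorted (PySem.Set.ofList
            ((PySem.List.sorted (V.filter (fun v => !(PySem.List.pyGetD v (-1) ' ' == c0))) (fun x => x)).map
              (fun v => PySem.List.pyGetD v (-1) ' '))) (fun c => c)
          ↔ ∃ v ∈ V.filter (fun v => !(PySem.List.pyGetD v (-1) ' ' == c0)), PySem.List.pyGetD v (-1) ' ' = c := by
        intro c
        rw [PySem.List.mem_sorted, PySem.Set.mem_ofList, List.mem_map]
        constructor
        · rintro ⟨v, hv, rfl⟩
          exact ⟨v, (PySem.List.sorted_perm _ _ _).mem_iff.mp hv, rfl⟩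
        · rintro ⟨v, hv, rfl⟩
          exact ⟨v, (PySem.List.sorted_perm _ _ _).mem_iff.mpr hv, rfl⟩
      have hK'nd : (PySem.List.sorted (PySem.Set.ofList
            ((PySem.List.sorted (V.filter (fun v => !(PySem.List.pyGetD v (-1) ' ' == c0))) (fun x => x)).map
              (fun v => PySem.List.pyGetD v (-1) ' '))) (fun c => c)).Nodup :=
        (PySem.List.sorted_perm _ _ _).nodup_iff.mpr (PySem.Set.nodup_ofList _)
      have hK'lt : ∀ k ∈ PySem.List.sorted (PySem.Set.ofList
            ((PySem.List.sorted (V.filter (fun v => !(PySem.List.pyGetD v (-1) ' ' == c0))) (fun x => x)).map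
              (fun v => PySem.List.pyGetD v (-1) ' '))) (fun c => c), c0 < k := by
        intro k hk
        obtain ⟨v, hv, rfl⟩ := (hmemK' k).mp hk
        have hvV : v ∈ V := hV'sub v hv
        have h1 : c0 ≤ (List.reverse v).headI := by
          apply hmin
          exact hRSperm.mem_iff.mpr (List.mem_map_of_mem hvV)
        rw [hlastF v hvV] at h1
        exact lt_of_le_of_ne h1 (Ne.symm (hV'ne v hv))
      have hKsplit : PySem.List.sorted (PySem.Set.ofList
            ((PySem.List.sorted V (fun x => x)).map (fun v => PySem.List.pyGetD v (-1) ' '))) (fun c => c)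
          = c0 :: PySem.List.sorted (PySem.Set.ofList
            ((PySem.List.sorted (V.filter (fun v => !(PySem.List.pyGetD v (-1) ' ' == c0))) (fun x => x)).map
              (fun v => PySem.List.pyGetD v (-1) ' '))) (fun c => c) := by
        apply pv_canon_chars
        · rw [List.perm_ext_iff_of_nodup
            (by exact List.nodup_cons.mpr ⟨fun hc => absurd ((hmemK' c0).mp hc) (by
                rintro ⟨v, hv, he⟩
                exact hV'ne v hv he), hK'nd⟩)
            (PySem.Set.nodup_ofList _)]
          intro c
          rw [PySem.Set.mem_ofList, List.mem_map, List.mem_cons]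
          constructor
          · rintro (rfl | hc)
            · exact ⟨v0, hLperm.mem_iff.mpr hv0V, hv0last⟩
            · obtain ⟨v, hv, rfl⟩ := (hmemK' c).mp hc
              exact ⟨v, hLperm.mem_iff.mpr (hV'sub v hv), rfl⟩
          · rintro ⟨v, hv, rfl⟩
            by_cases hc : PySem.List.pyGetD v (-1) ' ' = c0
            · exact Or.inl hc
            · refine Or.inr ((hmemK' _).mpr ⟨v, ?_, rfl⟩)
              rw [List.mem_filter]
              exact ⟨hLperm.mem_iff.mp hv, by simpa using hc⟩
        · exact List.pairwise_cons.mpr ⟨hK'lt, pv_keys_lt _⟩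
      -- class facts
      have hWne : V.filter (fun v => PySem.List.pyGetD v (-1) ' ' == c0) ≠ [] := by
        intro hc
        have hm : v0 ∈ V.filter (fun v => PySem.List.pyGetD v (-1) ' ' == c0) :=
          List.mem_filter.mpr ⟨hv0V, by simp [hv0last]⟩
        rw [hc] at hm
        simp at hm
      have hWlast : ∀ w ∈ V.filter (fun v => PySem.List.pyGetD v (-1) ' ' == c0),
          PySem.List.pyGetD w (-1) ' ' = c0 := by
        intro w hw
        have := List.of_mem_filter hw
        simpa using this
      have hWdecomp : ∀ w ∈ V.filter (fun v => PySem.List.pyGetD v (-1) ' ' == c0),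
          w.dropLast ++ [c0] = w := by
        intro w hw
        obtain ⟨u, c, hc⟩ := pv_concat_of_ne_nil (hne w (List.mem_of_mem_filter hw))
        have hl := hWlast w hw
        rw [hc, PySem.List.pyGetD_neg_one_append_singleton] at hl
        rw [hc, List.dropLast_concat, hl]
      have hps : (pvGroupsFold (PySem.List.sorted V (fun x => x))).getD c0 []
          = (PySem.List.sorted (V.filter (fun v => PySem.List.pyGetD v (-1) ' ' == c0)) (fun x => x)).map
              List.dropLast := by
        rw [pv_groups_getD', hLf]
      have hWsort_mem : ∀ w, w ∈ PySem.List.sorted (V.filter (fun v => PySem.List.pyGetD v (-1) ' ' == c0))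
          (fun x => x) ↔ w ∈ V.filter (fun v => PySem.List.pyGetD v (-1) ' ' == c0) :=
        fun w => (PySem.List.sorted_perm _ _ _).mem_iff
      -- the B-side run
      have hrun_tw : (((c0 :: cr) :: rs').takeWhile (fun x => x.headI == c0))
          = PySem.List.sorted ((V.filter (fun v => PySem.List.pyGetD v (-1) ' ' == c0)).map List.reverse)
              (fun x => x) := by
        rw [← hr0, ← hRSc, htdf.1, hrun_eq]
      have hrest_dw : (((c0 :: cr) :: rs').dropWhile (fun x => x.headI == c0))
          = PySem.List.sorted ((V.filter (fun v => !(PySem.List.pyGetD v (-1) ' ' == c0))).map List.reverse)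
              (fun x => x) := by
        rw [← hr0, ← hRSc, htdf.2, hrest_eq]
      have hrun_mem : ∀ r, r ∈ PySem.List.sorted ((V.filter
            (fun v => PySem.List.pyGetD v (-1) ' ' == c0)).map List.reverse) (fun x => x)
          ↔ ∃ w ∈ V.filter (fun v => PySem.List.pyGetD v (-1) ' ' == c0), r = w.reverse := by
        intro r
        rw [PySem.List.mem_sorted, List.mem_map]
        constructor
        · rintro ⟨w, hw, rfl⟩; exact ⟨w, hw, rfl⟩
        · rintro ⟨w, hw, rfl⟩; exact ⟨w, hw, rfl⟩
      -- goal reshaping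
      rw [pv_groups_keys, hKsplit, hRSc, hr0, pvEmitParts]
      simp only [List.map_cons]
      refine List.cons_eq_cons.mpr ⟨?_, ?_⟩
      · -- head part
        simp only [pvPartA]
        rw [hps]
        by_cases hlen1 : ∀ w ∈ V.filter (fun v => PySem.List.pyGetD v (-1) ' ' == c0), w.length = 1
        · -- every class member is the single char c0
          have hpref_all : ((PySem.List.sorted (V.filter (fun v => PySem.List.pyGetD v (-1) ' ' == c0))
              (fun x => x)).map List.dropLast).all (fun v => v.isEmpty) = true := by
            rw [List.all_eq_true]
            intro x hx
            obtain ⟨w, hw, rfl⟩ := List.mem_map.mp hx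
            have h1 := hlen1 w ((hWsort_mem w).mp hw)
            have : w.dropLast.length = 0 := by
              have : w.dropLast.length = w.length - 1 := List.length_dropLast
              omega
            simp [List.length_eq_zero_iff.mp this]
          have hpref_ne : ((PySem.List.sorted (V.filter (fun v => PySem.List.pyGetD v (-1) ' ' == c0))
              (fun x => x)).map List.dropLast) ≠ [] := by
            simp only [ne_eq, List.map_eq_nil_iff]
            rw [PySem.List.sorted_eq_nil_iff]
            exact hWne
          rw [if_pos ⟨hpref_ne, hpref_all⟩]
          have htails_nil : ((((c0 :: cr) :: rs').takeWhile (fun x => x.headI == c0)).map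
              (fun r => PySem.List.slice r (some 1) none)).filter (fun t => t ≠ []) = [] := by
            rw [List.filter_eq_nil_iff]
            intro t ht
            obtain ⟨r, hr, rfl⟩ := List.mem_map.mp ht
            rw [hrun_tw] at hr
            obtain ⟨w, hw, rfl⟩ := (hrun_mem r).mp hr
            have h1 := hlen1 w hw
            have hw1 : w = [c0] := by
              have hd := hWdecomp w hw
              have : w.dropLast.length = 0 := by
                have : w.dropLast.length = w.length - 1 := List.length_dropLast
                omega
              rw [List.length_eq_zero_iff.mp this] at hd
              simpa using hd.symm
            subst hw1
            simp [PySem.List.slice_from_one]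
          rw [htails_nil, if_pos rfl]
          simp [pvEscapeChar, pvEscB, pvRegexMetaB, pvRegexMeta]
        · -- every class member has length ≥ 2
          have hlen2 : ∀ w ∈ V.filter (fun v => PySem.List.pyGetD v (-1) ' ' == c0), 2 ≤ w.length := by
            push_neg at hlen1
            obtain ⟨wbig, hwbig, hwbig1⟩ := hlen1
            have hwbig2 : 2 ≤ wbig.length := by
              have : wbig ≠ [] := hne wbig (List.mem_of_mem_filter hwbig)
              have : wbig.length ≠ 0 := by simpa [List.length_eq_zero_iff]
              omega
            intro w hw
            by_contra hcon
            have hw1 : w.length = 1 := by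
              have : w ≠ [] := hne w (List.mem_of_mem_filter hw)
              have : w.length ≠ 0 := by simpa [List.length_eq_zero_iff]
              omega
            have hweq : w = [c0] := by
              have hd := hWdecomp w hw
              have : w.dropLast.length = 0 := by
                have : w.dropLast.length = w.length - 1 := List.length_dropLast
                omega
              rw [List.length_eq_zero_iff.mp this] at hd
              simpa using hd.symm
            have hsuf : w <:+ wbig := by
              rw [hweq]
              refine ⟨wbig.dropLast, ?_⟩
              exact hWdecomp wbig hwbig
            have hnewq : w ≠ wbig := by
              intro hc
              rw [hc] at hw1
              omega
            exact hns w (List.mem_of_mem_filter hw) wbig (List.mem_of_mem_filter hwbig) hnewq hsuf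
          -- A side: recursive build
          have hps_ne : ((PySem.List.sorted (V.filter (fun v => PySem.List.pyGetD v (-1) ' ' == c0))
              (fun x => x)).map List.dropLast) ≠ [] := by
            simp only [ne_eq, List.map_eq_nil_iff]
            rw [PySem.List.sorted_eq_nil_iff]
            exact hWne
          have hps_el : ∀ x ∈ (PySem.List.sorted (V.filter (fun v => PySem.List.pyGetD v (-1) ' ' == c0))
              (fun x => x)).map List.dropLast, x ≠ [] := by
            intro x hx
            obtain ⟨w, hw, rfl⟩ := List.mem_map.mp hx
            have h2 := hlen2 w ((hWsort_mem w).mp hw)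
            have hlen : w.dropLast.length = w.length - 1 := List.length_dropLast
            intro hc
            rw [hc] at hlen
            simp at hlen
            omega
          have hps_allE : ((PySem.List.sorted (V.filter (fun v => PySem.List.pyGetD v (-1) ' ' == c0))
              (fun x => x)).map List.dropLast).all (fun v => v.isEmpty) = false := by
            rw [List.all_eq_false]
            obtain ⟨x, hx⟩ := List.exists_mem_of_ne_nil _ hps_ne
            exact ⟨x, hx, by simpa [List.isEmpty_iff] using hps_el x hx⟩
          rw [if_neg (by simp [hps_allE])]
          rw [if_pos hps_ne]
          have hgood_ps : pvGood ((PySem.List.sorted (V.filter (fun v => PySem.List.pyGetD v (-1) ' ' == c0))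
              (fun x => x)).map List.dropLast) := by
            refine ⟨?_, hps_el, ?_⟩
            · apply List.Nodup.map_on
              · intro x hx y hy hxy
                rw [← hWdecomp x ((hWsort_mem x).mp hx), ← hWdecomp y ((hWsort_mem y).mp hy), hxy]
              · exact (PySem.List.sorted_perm _ _ _).nodup_iff.mpr (hnd.filter _)
            · intro x hx y hy hxny hsuf
              obtain ⟨w1, hw1, rfl⟩ := List.mem_map.mp hx
              obtain ⟨w2, hw2, rfl⟩ := List.mem_map.mp hy
              have hw1W := (hWsort_mem w1).mp hw1
              have hw2W := (hWsort_mem w2).mp hw2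
              obtain ⟨t, ht⟩ := hsuf
              have hsuf2 : w1 <:+ w2 := by
                refine ⟨t, ?_⟩
                rw [← hWdecomp w2 hw2W, ← hWdecomp w1 hw1W, ← ht]
                simp
              have hw12 : w1 ≠ w2 := by
                intro hc
                rw [hc] at hxny
                exact hxny rfl
              exact hns w1 (List.mem_of_mem_filter hw1W) w2 (List.mem_of_mem_filter hw2W) hw12 hsuf2
          have hmu_ps : pvSumLen ((PySem.List.sorted (V.filter (fun v => PySem.List.pyGetD v (-1) ' ' == c0))
              (fun x => x)).map List.dropLast) < N := by
            have e1 : pvSumLen ((PySem.List.sorted (V.filter (fun v => PySem.List.pyGetD v (-1) ' ' == c0))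
                (fun x => x)).map List.dropLast)
                = pvSumLen ((V.filter (fun v => PySem.List.pyGetD v (-1) ' ' == c0)).map List.dropLast) :=
              pv_sumLen_perm ((PySem.List.sorted_perm _ _ _).map _)
            have e2 : pvSumLen ((V.filter (fun v => PySem.List.pyGetD v (-1) ' ' == c0)).map List.dropLast)
                < pvSumLen (V.filter (fun v => PySem.List.pyGetD v (-1) ' ' == c0)) := by
              unfold pvSumLen
              rw [List.map_map]
              apply List.sum_lt_sum
              · intro w hw
                have hlen : w.dropLast.length = w.length - 1 := List.length_dropLast
                simp only [Function.comp_def]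
                omega
              · obtain ⟨w, hw⟩ := List.exists_mem_of_ne_nil _ hWne
                refine ⟨w, hw, ?_⟩
                have h2 := hlen2 w hw
                have hlen : w.dropLast.length = w.length - 1 := List.length_dropLast
                simp only [Function.comp_def]
                omega
            have e3 : pvSumLen (V.filter (fun v => PySem.List.pyGetD v (-1) ' ' == c0)) ≤ pvSumLen V :=
              pv_sumLen_sublist (List.filter_sublist)
            omega
          have hbuild := pv_P_of_Q _ hgood_ps (ih _ hmu_ps hgood_ps)
          rw [hbuild]
          have htails_eq : ((((c0 :: cr) :: rs').takeWhile (fun x => x.headI == c0)).map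
              (fun r => PySem.List.slice r (some 1) none)).filter (fun t => t ≠ [])
              = PySem.List.sorted ((((PySem.List.sorted (V.filter
                  (fun v => PySem.List.pyGetD v (-1) ' ' == c0)) (fun x => x)).map List.dropLast)).map
                  List.reverse) (fun x => x) := by
            rw [hrun_tw]
            simp only [PySem.List.slice_from_one]
            have hkeep : ∀ t ∈ (PySem.List.sorted ((V.filter (fun v => PySem.List.pyGetD v (-1) ' ' == c0)).map
                List.reverse) (fun x => x)).map List.tail, (t ≠ []) := by
              intro t ht
              obtain ⟨r, hr, rfl⟩ := List.mem_map.mp ht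
              obtain ⟨w, hw, rfl⟩ := (hrun_mem r).mp hr
              have hd := hWdecomp w hw
              have h2 := hlen2 w hw
              have htl : w.reverse.tail = w.dropLast.reverse := by
                conv_lhs => rw [← hd]
                simp
              rw [htl]
              simp only [ne_eq, List.reverse_eq_nil_iff]
              intro hc
              have hlen : w.dropLast.length = w.length - 1 := List.length_dropLast
              rw [hc] at hlen
              simp at hlen
              omega
            rw [List.filter_eq_self.mpr (fun t ht => by simpa using hkeep t ht)]
            refine (pv_canon ?_ ?_).symm
            · have p2 : ((V.filter (fun v => PySem.List.pyGetD v (-1) ' ' == c0)).map List.reverse).map List.tail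
                  = ((V.filter (fun v => PySem.List.pyGetD v (-1) ' ' == c0)).map List.dropLast).map List.reverse := by
                rw [List.map_map, List.map_map]
                apply List.map_congr_left
                intro w hw
                have hd := hWdecomp w hw
                simp only [Function.comp_def]
                conv_lhs => rw [← hd]
                simp
              refine ((PySem.List.sorted_perm _ _ _).map _).trans ?_
              rw [p2]
              exact (((PySem.List.sorted_perm _ _ _).map _).map _).symm
            · rw [List.pairwise_map]
              have hpw : (PySem.List.sorted ((V.filter (fun v => PySem.List.pyGetD v (-1) ' ' == c0)).map
                  List.reverse) (fun x => x)).Pairwise (· < ·) :=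
                pv_sorted_lt ((hnd.filter _).map (fun a b h => List.reverse_injective h))
              refine List.Pairwise.imp_of_mem ?_ hpw
              intro r1 r2 hr1 hr2 hlt
              obtain ⟨w1, hw1, rfl⟩ := (hrun_mem r1).mp hr1
              obtain ⟨w2, hw2, rfl⟩ := (hrun_mem r2).mp hr2
              have e1 : w1.reverse = c0 :: w1.dropLast.reverse := by
                conv_lhs => rw [← hWdecomp w1 hw1]
                simp
              have e2 : w2.reverse = c0 :: w2.dropLast.reverse := by
                conv_lhs => rw [← hWdecomp w2 hw2]
                simp
              rw [e1, e2] at hlt ⊢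
              simpa using pv_lex_cons hlt
          rw [htails_eq]
          have htails_ne : PySem.List.sorted ((((PySem.List.sorted (V.filter
              (fun v => PySem.List.pyGetD v (-1) ' ' == c0)) (fun x => x)).map List.dropLast)).map
              List.reverse) (fun x => x) ≠ [] := by
            rw [ne_eq, PySem.List.sorted_eq_nil_iff]
            simpa using hps_ne
          rw [if_neg htails_ne]
          simp only [Option.map_some]
          by_cases hE : pvEmit (PySem.List.sorted ((((PySem.List.sorted (V.filter
              (fun v => PySem.List.pyGetD v (-1) ' ' == c0)) (fun x => x)).map List.dropLast)).map
              List.reverse) (fun x => x)) = []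
          · rw [hE]
            simp [pvEscapeChar, pvEscB, pvRegexMetaB, pvRegexMeta]
          · rw [if_pos hE]
            simp [pvEscapeChar, pvEscB, pvRegexMetaB, pvRegexMeta]
      · -- tail of the parts list
        rw [hrest_dw]
        have hL2f : ∀ c, (PySem.List.sorted (V.filter (fun v => !(PySem.List.pyGetD v (-1) ' ' == c0)))
            (fun x => x)).filter (fun v => PySem.List.pyGetD v (-1) ' ' == c)
            = PySem.List.sorted ((V.filter (fun v => !(PySem.List.pyGetD v (-1) ' ' == c0))).filter
                (fun v => PySem.List.pyGetD v (-1) ' ' == c)) (fun x => x) := by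
          intro c
          refine (pv_canon ?_ ?_).symm
          · exact (PySem.List.sorted_perm _ _ _).filter _
          · exact (pv_sorted_lt (hnd.filter _)).filter _
        have hswitch : ∀ c ∈ PySem.List.sorted (PySem.Set.ofList
            ((PySem.List.sorted (V.filter (fun v => !(PySem.List.pyGetD v (-1) ' ' == c0))) (fun x => x)).map
              (fun v => PySem.List.pyGetD v (-1) ' '))) (fun c => c),
            pvPartA (PySem.List.sorted V (fun x => x)) c
              = pvPartA (PySem.List.sorted (V.filter (fun v => !(PySem.List.pyGetD v (-1) ' ' == c0)))
                  (fun x => x)) c := by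
          intro c hc
          obtain ⟨v', hv', rfl⟩ := (hmemK' c).mp hc
          have hcne : PySem.List.pyGetD v' (-1) ' ' ≠ c0 := hV'ne v' hv'
          have hfileq : (V.filter (fun v => !(PySem.List.pyGetD v (-1) ' ' == c0))).filter
              (fun v => PySem.List.pyGetD v (-1) ' ' == PySem.List.pyGetD v' (-1) ' ')
              = V.filter (fun v => PySem.List.pyGetD v (-1) ' ' == PySem.List.pyGetD v' (-1) ' ') := by
            rw [List.filter_filter]
            apply List.filter_congr
            intro v _
            cases hq : (PySem.List.pyGetD v (-1) ' ' == PySem.List.pyGetD v' (-1) ' ') with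
            | false => simp
            | true =>
              have he : PySem.List.pyGetD v (-1) ' ' = PySem.List.pyGetD v' (-1) ' ' := beq_iff_eq.mp hq
              simp [he, hcne]
          simp only [pvPartA]
          rw [pv_groups_getD', pv_groups_getD', hLf, hL2f, hfileq]
        rw [List.map_congr_left hswitch]
        have hgoodV2 : pvGood (V.filter (fun v => !(PySem.List.pyGetD v (-1) ' ' == c0))) := by
          refine ⟨hnd.filter _, fun v hv => hne v (List.mem_of_mem_filter hv), ?_⟩
          intro x hx y hy hxy hs
          exact hns x (List.mem_of_mem_filter hx) y (List.mem_of_mem_filter hy) hxy hs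
        have hmuV2 : pvSumLen (V.filter (fun v => !(PySem.List.pyGetD v (-1) ' ' == c0))) < N := by
          have hsplit : pvSumLen (V.filter (fun v => PySem.List.pyGetD v (-1) ' ' == c0))
              + pvSumLen (V.filter (fun v => !(PySem.List.pyGetD v (-1) ' ' == c0))) = pvSumLen V := by
            have hperm2 := List.filter_append_perm (fun v => PySem.List.pyGetD v (-1) ' ' == c0) V
            have he := pv_sumLen_perm hperm2
            rw [← he]
            unfold pvSumLen
            rw [List.map_append, List.sum_append]
          have hWpos : 1 ≤ pvSumLen (V.filter (fun v => PySem.List.pyGetD v (-1) ' ' == c0)) := by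
            cases hW : V.filter (fun v => PySem.List.pyGetD v (-1) ' ' == c0) with
            | nil => exact absurd hW hWne
            | cons a t =>
              simp [pvSumLen]
              omega
          omega
        have hQ2 := ih _ hmuV2 hgoodV2
        rw [pvQ, pv_groups_keys] at hQ2
        exact hQ2

theorem pv_main (V : List (List Char)) (h : pvGood V) :
    pvBuildSuffixRegex (PySem.List.sorted V (fun x => x))
      = some (pvEmit (PySem.List.sorted (V.map List.reverse) (fun x => x))) :=
  pv_P_of_Q V h (pv_Q_holds (pvSumLen V + 1) V (by omega) h)

theorem pv_hasSuffix_iff (S : List (List Char)) (hnd : S.Nodup) :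
    pvHasSuffixRelations S = true ↔ ∃ x ∈ S, ∃ y ∈ S, x ≠ y ∧ x <:+ y := by
  unfold pvHasSuffixRelations
  set ordered := PySem.List.sorted S (fun s => PySem.List.len s) with hord
  have hperm : ordered.Perm S := PySem.List.sorted_perm _ _ _
  have hndo : ordered.Nodup := (hperm.nodup_iff).mpr hnd
  rw [List.any_eq_true]
  constructor
  · rintro ⟨p, hp, hin⟩
    rw [PySem.List.mem_enumerate_iff] at hp
    obtain ⟨k, hk, rfl⟩ := hp
    rw [List.any_eq_true] at hin
    obtain ⟨long, hlong, hend⟩ := hin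
    simp only at hlong hend
    rw [PySem.List.slice_from _ (by omega)] at hlong
    have htn : ((0:Int) + (k:Int) + 1).toNat = k + 1 := by omega
    rw [htn] at hlong
    obtain ⟨m, hm, hget⟩ := List.mem_iff_getElem.mp hlong
    rw [List.getElem_drop] at hget
    have hklt : k + 1 + m < ordered.length := by
      have := List.length_drop (l := ordered) (i := k + 1); omega
    refine ⟨ordered[k], hperm.mem_iff.mp (List.getElem_mem hk), long,
      hperm.mem_iff.mp (hget ▸ List.getElem_mem hklt), ?_, ?_⟩
    · rw [← hget]
      intro hcon
      have := (List.Nodup.getElem_inj_iff hndo).mp hcon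
      omega
    · exact (PySem.Chars.endswith_iff _ _).mp hend
  · rintro ⟨x, hx, y, hy, hne, hsuf⟩
    have hlen : x.length < y.length := by
      have hle := hsuf.length_le
      rcases Nat.lt_or_ge x.length y.length with h | h
      · exact h
      · exact absurd (hsuf.eq_of_length (by omega)) hne
    obtain ⟨i, hi, hgi⟩ := List.mem_iff_getElem.mp (hperm.mem_iff.mpr hx)
    obtain ⟨j, hj, hgj⟩ := List.mem_iff_getElem.mp (hperm.mem_iff.mpr hy)
    have hij : i < j := by
      rcases Nat.lt_or_ge i j with h | h
      · exact h
      · exfalso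
        have hmono := PySem.List.key_sorted_getElem_mono (xs := S)
          (key := fun s => PySem.List.len s) (p := j) (q := i) h (by rw [← hord]; omega)
        have hmono' : PySem.List.len ordered[j] ≤ PySem.List.len ordered[i] := hmono
        rw [hgi, hgj] at hmono'
        simp only [PySem.List.len_eq] at hmono'
        omega
    refine ⟨((0:Int) + (i:Int), ordered[i]), ?_, ?_⟩
    · rw [PySem.List.mem_enumerate_iff]; exact ⟨i, hi, rfl⟩
    · rw [List.any_eq_true]
      refine ⟨y, ?_, ?_⟩
      · simp only
        rw [PySem.List.slice_from _ (by omega)]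
        have htn : ((0:Int) + (i:Int) + 1).toNat = i + 1 := by omega
        rw [htn]
        rw [List.mem_iff_getElem]
        refine ⟨j - (i+1), by rw [List.length_drop]; omega, ?_⟩
        rw [List.getElem_drop]
        have hidx : i + 1 + (j - (i+1)) = j := by omega
        simp only [hidx]
        exact hgj
      · simp only [hgi]
        exact (PySem.Chars.endswith_iff _ _).mpr hsuf

-- ---------- B-side: lex / lcp / prefix toolbox ----------

theorem pv_lex_head {a b : Char} {t1 t2 : List Char} (h : (a :: t1) < (b :: t2)) :
    a < b ∨ (a = b ∧ t1 < t2) := by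
  have h' : List.Lex (· < ·) (a :: t1) (b :: t2) := h
  cases h' with
  | rel hr => exact Or.inl hr
  | cons h'' => exact Or.inr ⟨rfl, h''⟩

theorem pv_lex_of_getElem : ∀ (j : Nat) (x y : List Char), x.take j = y.take j →
    ∀ (hx : j < x.length) (hy : j < y.length), x[j] < y[j] → x < y := by
  intro j
  induction j with
  | zero =>
    intro x y _ hx hy hlt
    match x, y with
    | a :: xs, b :: ys =>
      simp only [List.getElem_cons_zero] at hlt
      exact List.Lex.rel hlt
  | succ j ih =>
    intro x y ht hx hy hlt
    match x, y with
    | a :: xs, b :: ys =>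
      simp only [List.take_succ_cons, List.cons.injEq] at ht
      obtain ⟨rfl, ht'⟩ := ht
      simp only [List.getElem_cons_succ] at hlt
      exact List.Lex.cons (ih xs ys ht' (by simpa using hx) (by simpa using hy) hlt)

theorem pv_getElem_le (j : Nat) (x y : List Char) (ht : x.take j = y.take j)
    (hx : j < x.length) (hy : j < y.length) (hxy : ¬ y < x) : x[j] ≤ y[j] := by
  by_contra hc
  exact hxy (pv_lex_of_getElem j y x ht.symm hy hx (lt_of_not_ge hc))

theorem pv_lt_append (x : List Char) (t : List Char) (ht : t ≠ []) : x < x ++ t := by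
  induction x with
  | nil =>
    match t with
    | c :: r => exact List.Lex.nil
  | cons a xs ih => exact List.Lex.cons ih

theorem pv_lt_of_prefix {x y : List Char} (h : x <+: y) (hne : x ≠ y) : x < y := by
  obtain ⟨t, rfl⟩ := h
  have ht : t ≠ [] := by rintro rfl; simp at hne
  exact pv_lt_append x t ht

theorem pv_between : ∀ (x z y : List Char), x <+: y → x < z → (z < y ∨ z = y) → x <+: z := by
  intro x
  induction x with
  | nil => intro z y _ _ _; exact List.nil_prefix
  | cons a x' ih =>
    intro z y hxy hxz hzy
    match y, hxy with
    | _, ⟨t, rfl⟩ =>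
      match z with
      | [] => exact absurd hxz (List.not_lex_nil)
      | b :: z' =>
        rcases pv_lex_head hxz with hab | ⟨rfl, hx'z'⟩
        · exfalso
          rcases hzy with hzy | hzy
          · have : b :: z' < a :: (x' ++ t) := by simpa using hzy
            rcases pv_lex_head this with hba | ⟨hba, _⟩
            · exact absurd hab (lt_asymm hba)
            · exact absurd hab (by simp [hba])
          · have : b = a := by simpa using congrArg (fun l => List.headI l) hzy
            exact absurd hab (by simp [this])
        · have hz'y : z' < x' ++ t ∨ z' = x' ++ t := by
            rcases hzy with hzy | hzy
            · have : a :: z' < a :: (x' ++ t) := by simpa using hzy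
              exact Or.inl (pv_lex_cons this)
            · exact Or.inr (by simpa using hzy)
          exact (List.cons_prefix_cons).mpr ⟨rfl, ih z' (x' ++ t) ⟨t, rfl⟩ hx'z' hz'y⟩

theorem pvLcp_le_left : ∀ a b : List Char, pvLcp a b ≤ a.length := by
  intro a
  induction a with
  | nil => intro b; rw [pvLcp.eq_def]; cases b <;> simp
  | cons x xs ih =>
    intro b
    cases b with
    | nil => rw [pvLcp.eq_def]; simp
    | cons y ys =>
      simp only [pvLcp]
      split
      · have := ih ys; simpa using this
      · simp

theorem pvLcp_comm : ∀ a b : List Char, pvLcp a b = pvLcp b a := by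
  intro a
  induction a with
  | nil => intro b; rw [pvLcp.eq_def, pvLcp.eq_def]; cases b <;> simp
  | cons x xs ih =>
    intro b
    cases b with
    | nil => rw [pvLcp.eq_def, pvLcp.eq_def]
    | cons y ys =>
      simp only [pvLcp]
      by_cases h : x = y
      · subst h; simp [ih ys]
      · simp [h, Ne.symm h]

theorem pvLcp_eq_length_iff : ∀ a b : List Char, pvLcp a b = a.length ↔ a <+: b := by
  intro a
  induction a with
  | nil => intro b; rw [pvLcp.eq_def]; cases b <;> simp
  | cons x xs ih =>
    intro b
    cases b with
    | nil =>
      rw [pvLcp.eq_def]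
      simp
    | cons y ys =>
      simp only [pvLcp]
      rw [List.cons_prefix_cons]
      by_cases h : x = y
      · subst h; simpa using ih ys
      · simp [h]

theorem pvLcp_take : ∀ a b : List Char, a.take (pvLcp a b) = b.take (pvLcp a b) := by
  intro a
  induction a with
  | nil => intro b; rw [pvLcp.eq_def]; cases b <;> simp
  | cons x xs ih =>
    intro b
    cases b with
    | nil => rw [pvLcp.eq_def]; simp
    | cons y ys =>
      simp only [pvLcp]
      by_cases h : x = y
      · subst h; simp [ih ys]
      · simp [h]

theorem pvLcp_get_ne : ∀ a b : List Char, ∀ (h1 : pvLcp a b < a.length) (h2 : pvLcp a b < b.length),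
    a[pvLcp a b] ≠ b[pvLcp a b] := by
  intro a
  induction a with
  | nil => intro b h1 h2; simp at h1
  | cons x xs ih =>
    intro b h1 h2
    cases b with
    | nil => simp at h2
    | cons y ys =>
      simp only [pvLcp] at h1 h2 ⊢
      by_cases h : x = y
      · subst h
        simp only [if_pos rfl] at h1 h2 ⊢
        simpa using ih ys (by simpa using h1) (by simpa using h2)
      · simpa [h] using h

-- ---------- B-side: the stack machine meets the reference emitter ----------

def pvLtAt (x q : List Char) (j : Nat) : Bool :=
  match x[j]?, q[j]? with
  | some a, some b => decide (a < b)
  | _, _ => false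

/-- children of trie node `q.take j` that branch on a char smaller than `q[j]` -/
def pvBr (P : List (List Char)) (q : List Char) (j : Nat) : List (List Char) :=
  (P.filter (fun x => decide (x.take j = q.take j) && pvLtAt x q j)).map (fun x => x.drop j)

/-- all tails below trie node `q.take j` -/
def pvTl (P : List (List Char)) (q : List Char) (j : Nat) : List (List Char) :=
  ((P.filter (fun x => decide (x.take j = q.take j))).map (fun x => x.drop j)).filter
    (fun t => t ≠ [])

def pvBelow (P : List (List Char)) (q : List Char) : Nat → List (List (List Char))
  | 0 => []
  | t + 1 => pvEmitParts (pvBr P q t) :: pvBelow P q t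

/-- the machine stack while the node at depth `t` is on top -/
def pvStkOf (P : List (List Char)) (q : List Char) (t : Nat) : List (List (List Char)) :=
  pvEmitParts (pvTl P q t) :: pvBelow P q t

def pvSGood (M : List (List Char)) : Prop :=
  M.Pairwise (· < ·) ∧ (∀ x ∈ M, x ≠ []) ∧ M.Pairwise (fun x y => ¬ x <+: y)

theorem pvEmitParts_nil : pvEmitParts [] = [] := by rw [pvEmitParts]

theorem pvBelow_length (P : List (List Char)) (q : List Char) :
    ∀ t, (pvBelow P q t).length = t := by
  intro t
  induction t with
  | zero => rfl
  | succ t ih => simp [pvBelow, ih]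

theorem pvBelow_congr (A B : List (List Char)) (a b : List Char) :
    ∀ t, (∀ j, j < t → pvBr A a j = pvBr B b j) → pvBelow A a t = pvBelow B b t := by
  intro t
  induction t with
  | zero => intro _; rfl
  | succ t ih =>
    intro h
    simp only [pvBelow]
    rw [h t (by omega), ih (fun j hj => h j (by omega))]

theorem pvBelow_high (P : List (List Char)) (q : List Char) (l : Nat) :
    ∀ t, l + 1 ≤ t → (∀ j, l < j → j < t → pvBr P q j = []) →
      pvBelow P q t = List.replicate (t - (l + 1)) [] ++ pvBelow P q (l + 1) := by
  intro t
  induction t with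
  | zero => intro h; omega
  | succ t ih =>
    intro h hz
    by_cases he : l + 1 = t + 1
    · rw [← he]; simp
    · have hlt : l + 1 ≤ t := by omega
      simp only [pvBelow]
      rw [hz t (by omega) (by omega), ih hlt (fun j h1 h2 => hz j h1 (by omega)),
        pvEmitParts_nil]
      have : t + 1 - (l + 1) = (t - (l + 1)) + 1 := by omega
      rw [this, List.replicate_succ]
      simp [pvBelow]

-- takeWhile/dropWhile through an append whose second half is all-false
theorem pv_tw_append {α : Type} (p : α → Bool) :
    ∀ (A C : List α), (∀ c ∈ C, p c = false) →
      (A ++ C).takeWhile p = A.takeWhile p ∧ (A ++ C).dropWhile p = A.dropWhile p ++ C := by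
  intro A
  induction A with
  | nil =>
    intro C hC
    cases C with
    | nil => simp
    | cons c cs =>
      have := hC c List.mem_cons_self
      simp [List.takeWhile_cons, List.dropWhile_cons, this]
  | cons a A' ih =>
    intro C hC
    cases hpa : p a with
    | true =>
      have := ih C hC
      simp [List.takeWhile_cons, List.dropWhile_cons, hpa, this.1, this.2]
    | false =>
      simp [List.takeWhile_cons, List.dropWhile_cons, hpa]

theorem pv_tw_all {α : Type} (p : α → Bool) :
    ∀ (l : List α), (∀ x ∈ l, p x = true) → l.takeWhile p = l ∧ l.dropWhile p = [] := by
  intro l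
  induction l with
  | nil => intro _; simp
  | cons a t ih =>
    intro h
    have hpa := h a List.mem_cons_self
    have := ih (fun x hx => h x (List.mem_cons_of_mem _ hx))
    simp [List.takeWhile_cons, List.dropWhile_cons, hpa, this.1, this.2]

theorem pv_EP_append : ∀ (A C : List (List Char)),
    (∀ a ∈ A, a ≠ []) → (∀ c ∈ C, c ≠ []) → (∀ a ∈ A, ∀ c ∈ C, a.headI < c.headI) →
    pvEmitParts (A ++ C) = pvEmitParts A ++ pvEmitParts C := by
  suffices h : ∀ n (A C : List (List Char)), A.length ≤ n →
      (∀ a ∈ A, a ≠ []) → (∀ c ∈ C, c ≠ []) → (∀ a ∈ A, ∀ c ∈ C, a.headI < c.headI) →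
      pvEmitParts (A ++ C) = pvEmitParts A ++ pvEmitParts C by
    exact fun A C hA hC hs => h A.length A C le_rfl hA hC hs
  intro n
  induction n with
  | zero =>
    intro A C hlen _ _ _
    have : A = [] := List.length_eq_zero_iff.mp (by omega)
    subst this
    simp [pvEmitParts_nil]
  | succ n ih =>
    intro A C hlen hA hC hsep
    match A with
    | [] => simp [pvEmitParts_nil]
    | a :: A2 =>
      have ha := hA a List.mem_cons_self
      match a, ha with
      | c0 :: a', _ =>
        have hCfalse : ∀ x ∈ C, ((fun x => x.headI == c0) x) = false := by
          intro x hx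
          have h' : c0 < x.headI := by
            simpa using hsep (c0 :: a') List.mem_cons_self x hx
          simp only [beq_eq_false_iff_ne, ne_eq]
          intro hc
          rw [hc] at h'
          exact lt_irrefl _ h'
        have htw := pv_tw_append (fun x => x.headI == c0) ((c0 :: a') :: A2) C hCfalse
        rw [List.cons_append] at htw
        rw [List.cons_append, pvEmitParts]
        conv_rhs => rw [pvEmitParts]
        rw [htw.1, htw.2]
        have hdw : ((c0 :: a') :: A2).dropWhile (fun x => x.headI == c0)
            = A2.dropWhile (fun x => x.headI == c0) := by
          simp [List.dropWhile_cons]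
        rw [hdw]
        have hsub : (A2.dropWhile (fun x => x.headI == c0)).Sublist A2 :=
          List.dropWhile_sublist _
        have hrec := ih (A2.dropWhile (fun x => x.headI == c0)) C
          (by have := hsub.length_le; simp at hlen ⊢; omega)
          (fun x hx => hA x (List.mem_cons_of_mem _ (hsub.mem hx)))
          hC
          (fun x hx c hc => hsep x (List.mem_cons_of_mem _ (hsub.mem hx)) c hc)
        rw [hrec]
        simp

theorem pv_EP_run (rs : List (List Char)) (c : Char) (hne : rs ≠ [])
    (hh : ∀ r ∈ rs, r.headI = c) (hnn : ∀ r ∈ rs, r ≠ []) :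
    pvEmitParts rs = [(if ((rs.map (fun r => PySem.List.slice r (some 1) none)).filter
        (fun t => t ≠ [])) = [] then []
      else pvEmit ((rs.map (fun r => PySem.List.slice r (some 1) none)).filter
        (fun t => t ≠ []))) ++ pvEscB c] := by
  match rs with
  | [] => exact absurd rfl hne
  | [] :: r => exact absurd rfl (hnn [] List.mem_cons_self)
  | (c0 :: cr) :: rest =>
    have hc0 : c0 = c := by
      have := hh (c0 :: cr) List.mem_cons_self
      simpa using this
    subst hc0
    have hall : ∀ x ∈ (c0 :: cr) :: rest, ((fun x => x.headI == c0) x) = true := by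
      intro x hx
      simp [hh x hx]
    have htw := pv_tw_all (fun x => x.headI == c0) ((c0 :: cr) :: rest) hall
    rw [pvEmitParts, htw.1, htw.2, pvEmitParts_nil]

theorem pv_render_emit (ts : List (List Char)) (hnn : ∀ t ∈ ts, t ≠ []) :
    pvRender (pvEmitParts ts) = if ts = [] then [] else pvEmit ts := by
  match ts with
  | [] => simp [pvEmitParts_nil, pvRender]
  | r :: rest =>
    have hr := hnn r List.mem_cons_self
    match r, hr with
    | c :: cr, _ =>
      rw [if_neg (by simp), pvEmit]
      have hEP : ∃ p0 l0, pvEmitParts ((c :: cr) :: rest) = p0 :: l0 := by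
        rw [pvEmitParts]
        exact ⟨_, _, rfl⟩
      obtain ⟨p0, l0, hEP⟩ := hEP
      rw [hEP, pvRender]
      split
      · rfl
      · rw [if_pos (by simp)]

theorem pv_filter_or_append (l : List (List Char)) (p r : List Char → Bool)
    (hp : l.Pairwise (· < ·))
    (hord : ∀ x ∈ l, ∀ y ∈ l, r x = true → p y = true → ¬ x < y)
    (hdisj : ∀ x ∈ l, ¬(p x = true ∧ r x = true)) :
    l.filter (fun x => p x || r x) = l.filter p ++ l.filter r := by
  induction l with
  | nil => simp
  | cons a t ih =>
    obtain ⟨hat, ht⟩ := List.pairwise_cons.mp hp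
    have hord' : ∀ x ∈ t, ∀ y ∈ t, r x = true → p y = true → ¬ x < y := by
      intro x hx y hy
      exact hord x (List.mem_cons_of_mem _ hx) y (List.mem_cons_of_mem _ hy)
    have hdisj' : ∀ x ∈ t, ¬(p x = true ∧ r x = true) :=
      fun x hx => hdisj x (List.mem_cons_of_mem _ hx)
    cases hpa : p a with
    | true =>
      have hra : r a = false := by
        cases hra : r a with
        | false => rfl
        | true => exact absurd ⟨hpa, hra⟩ (hdisj a List.mem_cons_self)
      simp only [List.filter_cons, hpa, hra, Bool.true_or, if_true]
      rw [ih ht hord' hdisj']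
      simp
    | false =>
      cases hra : r a with
      | false =>
        simp only [List.filter_cons, hpa, hra, Bool.or_false, if_false]
        exact ih ht hord' hdisj'
      | true =>
        have hnp : ∀ y ∈ t, p y = false := by
          intro y hy
          cases hpy : p y with
          | false => rfl
          | true =>
            exact absurd (hat y hy)
              (hord a List.mem_cons_self y (List.mem_cons_of_mem _ hy) hra hpy)
        have hfe : t.filter p = [] :=
          List.filter_eq_nil_iff.mpr (fun y hy => by simp [hnp y hy])
        have hcong : t.filter (fun x => p x || r x) = t.filter r :=
          List.filter_congr (fun y hy => by simp [hnp y hy])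
        simp only [List.filter_cons, hpa, hra, Bool.false_or, if_true, if_false]
        rw [hcong, hfe]
        simp

theorem pv_take_succ_iff (x q : List Char) (j : Nat) (hq : j < q.length) :
    x.take (j+1) = q.take (j+1) ↔ (x.take j = q.take j ∧ x[j]? = q[j]?) := by
  constructor
  · intro h
    have hlx : j < x.length := by
      have := congrArg List.length h
      simp only [List.length_take] at this
      omega
    rw [List.take_succ, List.take_succ] at h
    rw [List.getElem?_eq_getElem hlx, List.getElem?_eq_getElem hq] at h
    simp only [Option.toList_some] at h
    have hlen2 : (x.take j).length = (q.take j).length := by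
      simp only [List.length_take]
      omega
    obtain ⟨h1, h2⟩ := List.append_inj h hlen2
    refine ⟨h1, ?_⟩
    rw [List.getElem?_eq_getElem hlx, List.getElem?_eq_getElem hq]
    simpa using h2
  · rintro ⟨h1, h2⟩
    have hq' : q[j]? = some q[j] := List.getElem?_eq_getElem hq
    have hlx : j < x.length := by
      rw [hq'] at h2
      exact List.getElem?_eq_some_iff.mp h2 |>.fst
    rw [List.take_succ, List.take_succ, h1, h2]

theorem pvLtAt_iff (x q : List Char) (j : Nat) :
    pvLtAt x q j = true ↔ ∃ a b, x[j]? = some a ∧ q[j]? = some b ∧ a < b := by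
  unfold pvLtAt
  cases hx : x[j]? with
  | none => simp
  | some a =>
    cases hq : q[j]? with
    | none => simp
    | some b => simp

theorem pvLtAt_self (q : List Char) (j : Nat) : pvLtAt q q j = false := by
  unfold pvLtAt
  cases hq : q[j]? with
  | none => rfl
  | some a => simp

theorem pv_C3 (M : List (List Char)) (q : List Char) (hg : pvSGood (M ++ [q]))
    (j : Nat) (hj : j < q.length) :
    pvEmitParts (pvTl (M ++ [q]) q j)
      = pvEmitParts (pvBr (M ++ [q]) q j)
        ++ [pvRender (pvEmitParts (pvTl (M ++ [q]) q (j+1))) ++ pvEscB (q.getD j ' ')] := by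
  obtain ⟨hsort, hnn, hnp⟩ := hg
  have hmax : ∀ x ∈ M, x < q := by
    have h := (List.pairwise_append.mp hsort).2.2
    intro x hx
    exact h x hx q (by simp)
  have hnpM : ∀ x ∈ M, ¬ x <+: q := by
    have h := (List.pairwise_append.mp hnp).2.2
    intro x hx
    exact h x hx q (by simp)
  have hq' : q[j]? = some q[j] := List.getElem?_eq_getElem hj
  have hlen : ∀ x ∈ M ++ [q], x.take j = q.take j → j < x.length := by
    intro x hx ht
    by_contra hle
    push_neg at hle
    have hxq : x = q.take j := by rw [← ht, List.take_of_length_le hle]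
    have hpre : x <+: q := hxq ▸ List.take_prefix j q
    rcases List.mem_append.mp hx with hxM | hxq'
    · exact hnpM x hxM hpre
    · have hx2 : x = q := by simpa using hxq'
      subst hx2
      have := congrArg List.length hxq
      simp [List.length_take] at this
      omega
  have hle_at : ∀ x ∈ M ++ [q], x.take j = q.take j → ∀ (hxl : j < x.length), x[j] ≤ q[j] := by
    intro x hx ht hxl
    apply pv_getElem_le j x q ht hxl hj
    rcases List.mem_append.mp hx with hxM | hxq'
    · exact lt_asymm (hmax x hxM)
    · have hx2 : x = q := by simpa using hxq'
      subst hx2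
      exact lt_irrefl x
  have hTl : pvTl (M ++ [q]) q j
      = ((M ++ [q]).filter (fun x => decide (x.take j = q.take j))).map (fun x => x.drop j) := by
    unfold pvTl
    apply List.filter_eq_self.mpr
    intro t htm
    obtain ⟨x, hxf, rfl⟩ := List.mem_map.mp htm
    have hx := List.mem_of_mem_filter hxf
    have hcond : x.take j = q.take j := by
      have := (List.mem_filter.mp hxf).2
      simpa using this
    have := hlen x hx hcond
    simp [List.drop_eq_nil_iff]
    omega
  have hsplit : (M ++ [q]).filter (fun x => decide (x.take j = q.take j))
      = (M ++ [q]).filter (fun x => decide (x.take j = q.take j) && pvLtAt x q j)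
        ++ (M ++ [q]).filter (fun x => decide (x.take j = q.take j) && (x[j]? == q[j]?)) := by
    rw [← pv_filter_or_append (M ++ [q]) _ _ hsort ?ord ?disj]
    · apply List.filter_congr
      intro x hx
      by_cases hcond : x.take j = q.take j
      · have hxl := hlen x hx hcond
        have hx' : x[j]? = some x[j] := List.getElem?_eq_getElem hxl
        have hle := hle_at x hx hcond hxl
        rcases lt_or_eq_of_le hle with hlt | heq
        · have hT : pvLtAt x q j = true := (pvLtAt_iff x q j).mpr ⟨x[j], q[j], hx', hq', hlt⟩
          simp [hcond, hT]
        · have hT : (x[j]? == q[j]?) = true := by rw [hx', hq', heq]; simp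
          simp [hcond, hT]
      · simp [hcond]
    case ord =>
      intro x hx y hy hrx hpy
      simp only [Bool.and_eq_true, decide_eq_true_eq, beq_iff_eq] at hrx hpy
      obtain ⟨htx, hex⟩ := hrx
      obtain ⟨hty, hlty⟩ := hpy
      obtain ⟨a, b, hy', hqb, hab⟩ := (pvLtAt_iff y q j).mp hlty
      rw [hq'] at hqb hex
      have hxe := List.getElem?_eq_some_iff.mp hex
      obtain ⟨hxlen, hxval⟩ := hxe
      obtain ⟨hylen, hyval⟩ := List.getElem?_eq_some_iff.mp hy'
      have hyx : y < x := by
        apply pv_lex_of_getElem j y x (hty.trans htx.symm) hylen hxlen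
        rw [hxval, hyval]
        have hb : b = q[j] := (Option.some.inj hqb).symm
        rw [hb] at hab
        exact hab
      exact lt_asymm hyx
    case disj =>
      rintro x hx ⟨hpx, hrx⟩
      simp only [Bool.and_eq_true, decide_eq_true_eq, beq_iff_eq] at hpx hrx
      obtain ⟨a, b, hx', hqb, hab⟩ := (pvLtAt_iff x q j).mp hpx.2
      rw [hrx.2, hqb] at hx'
      have hba : b = a := Option.some.inj hx'
      subst hba
      exact lt_irrefl _ hab
  -- the subtree through q[j]
  have hqR : q ∈ M ++ [q] := by simp
  have hqE : q ∈ (M ++ [q]).filter (fun x => decide (x.take j = q.take j) && (x[j]? == q[j]?)) :=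
    List.mem_filter.mpr ⟨hqR, by simp⟩
  have hEfact : ∀ t ∈ ((M ++ [q]).filter
        (fun x => decide (x.take j = q.take j) && (x[j]? == q[j]?))).map (fun x => x.drop j),
      t ≠ [] ∧ t.headI = q[j] := by
    intro t htm
    obtain ⟨x, hxf, rfl⟩ := List.mem_map.mp htm
    have hfc := (List.mem_filter.mp hxf).2
    simp only [Bool.and_eq_true, decide_eq_true_eq, beq_iff_eq] at hfc
    obtain ⟨htx, hex⟩ := hfc
    rw [hq'] at hex
    obtain ⟨hxlen, hxval⟩ := List.getElem?_eq_some_iff.mp hex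
    rw [List.drop_eq_getElem_cons hxlen, hxval]
    exact ⟨by simp, by simp⟩
  have hAfact : ∀ a ∈ pvBr (M ++ [q]) q j, a ≠ [] ∧ a.headI < q[j] := by
    intro a ham
    obtain ⟨x, hxf, rfl⟩ := List.mem_map.mp ham
    have hfc := (List.mem_filter.mp hxf).2
    simp only [Bool.and_eq_true, decide_eq_true_eq] at hfc
    obtain ⟨htx, hltx⟩ := hfc
    obtain ⟨a', b, hx', hqb, hab⟩ := (pvLtAt_iff x q j).mp hltx
    rw [hq'] at hqb
    have hb : b = q[j] := (Option.some.inj hqb).symm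
    obtain ⟨hxlen, hxval⟩ := List.getElem?_eq_some_iff.mp hx'
    rw [List.drop_eq_getElem_cons hxlen, hxval]
    subst hb
    exact ⟨by simp, by simpa using hab⟩
  have hEne : ((M ++ [q]).filter
      (fun x => decide (x.take j = q.take j) && (x[j]? == q[j]?))).map (fun x => x.drop j) ≠ [] :=
    List.ne_nil_of_mem (List.mem_map_of_mem hqE)
  have hrun := pv_EP_run _ q[j] hEne (fun t ht => (hEfact t ht).2) (fun t ht => (hEfact t ht).1)
  have htails : ((((M ++ [q]).filter
        (fun x => decide (x.take j = q.take j) && (x[j]? == q[j]?))).map (fun x => x.drop j)).map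
          (fun r => PySem.List.slice r (some 1) none)).filter (fun t => t ≠ [])
      = pvTl (M ++ [q]) q (j+1) := by
    rw [List.map_map]
    have hmc : ((M ++ [q]).filter
          (fun x => decide (x.take j = q.take j) && (x[j]? == q[j]?))).map
            ((fun r => PySem.List.slice r (some 1) none) ∘ (fun x => x.drop j))
        = ((M ++ [q]).filter
          (fun x => decide (x.take j = q.take j) && (x[j]? == q[j]?))).map
            (fun x => x.drop (j+1)) := by
      apply List.map_congr_left
      intro x _
      simp [Function.comp_def, PySem.List.slice_from_one, List.tail_drop]
    rw [hmc]
    have hfc : (M ++ [q]).filter (fun x => decide (x.take j = q.take j) && (x[j]? == q[j]?))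
        = (M ++ [q]).filter (fun x => decide (x.take (j+1) = q.take (j+1))) := by
      apply List.filter_congr
      intro x _
      rw [Bool.eq_iff_iff]
      simp only [Bool.and_eq_true, decide_eq_true_eq, beq_iff_eq]
      exact (pv_take_succ_iff x q j hj).symm
    rw [hfc]
    rfl
  have hTlne : ∀ t ∈ pvTl (M ++ [q]) q (j+1), t ≠ [] := by
    intro t ht
    have := (List.mem_filter.mp ht).2
    simpa using this
  rw [hTl, hsplit, List.map_append]
  have hBrdef : pvBr (M ++ [q]) q j
      = ((M ++ [q]).filter (fun x => decide (x.take j = q.take j) && pvLtAt x q j)).map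
        (fun x => x.drop j) := rfl
  rw [← hBrdef]
  rw [pv_EP_append _ _ (fun a ha => (hAfact a ha).1) (fun c hc => (hEfact c hc).1)
    (fun a ha c hc => by rw [(hEfact c hc).2]; exact (hAfact a ha).2)]
  congr 1
  rw [hrun, htails]
  have hgetD : q.getD j ' ' = q[j] := List.getD_eq_getElem q ' ' hj
  rw [hgetD, pv_render_emit _ hTlne]

theorem pv_closeTo_stk (M : List (List Char)) (q : List Char) (hg : pvSGood (M ++ [q]))
    (l : Nat) : ∀ t, l ≤ t → t ≤ q.length →
    pvCloseTo l q (pvStkOf (M ++ [q]) q t) = pvStkOf (M ++ [q]) q l := by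
  intro t
  induction t with
  | zero =>
    intro hl _
    have h0 : l = 0 := by omega
    subst h0
    rw [pvCloseTo, dif_neg]
    simp [pvStkOf, pvBelow_length]
  | succ t ih =>
    intro hl ht
    by_cases he : l = t + 1
    · subst he
      rw [pvCloseTo, dif_neg]
      simp [pvStkOf, pvBelow_length]
    · have hlt : l ≤ t := by omega
      rw [pvCloseTo, dif_pos (by simp [pvStkOf, pvBelow_length]; omega)]
      have hstep : pvCloseStep q (pvStkOf (M ++ [q]) q (t + 1)) = pvStkOf (M ++ [q]) q t := by
        have hform : pvStkOf (M ++ [q]) q (t + 1)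
            = pvEmitParts (pvTl (M ++ [q]) q (t + 1))
              :: pvEmitParts (pvBr (M ++ [q]) q t) :: pvBelow (M ++ [q]) q t := rfl
        rw [hform]
        show (pvEmitParts (pvBr (M ++ [q]) q t)
            ++ [pvRender (pvEmitParts (pvTl (M ++ [q]) q (t + 1)))
              ++ pvEscB (PySem.List.pyGetD q
                (((pvEmitParts (pvBr (M ++ [q]) q t) :: pvBelow (M ++ [q]) q t).length : Int) - 1)
                ' ')]) :: pvBelow (M ++ [q]) q t = _
        have hlen : ((pvEmitParts (pvBr (M ++ [q]) q t) :: pvBelow (M ++ [q]) q t).length : Int) - 1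
            = ((t : Nat) : Int) := by
          simp [pvBelow_length]
        rw [hlen, PySem.List.pyGetD_natCast]
        have hc3 := pv_C3 M q hg t (by omega)
        rw [show List.getD q t ' ' = q.getD t ' ' from rfl] at *
        rw [show pvStkOf (M ++ [q]) q t
            = pvEmitParts (pvTl (M ++ [q]) q t) :: pvBelow (M ++ [q]) q t from rfl]
        rw [hc3]
      rw [hstep]
      exact ih hlt (by omega)

theorem pvBelow_all_nil (P : List (List Char)) (q : List Char) :
    ∀ t, (∀ j, j < t → pvBr P q j = []) → pvBelow P q t = List.replicate t [] := by
  intro t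
  induction t with
  | zero => intro _; rfl
  | succ t ih =>
    intro h
    simp only [pvBelow, List.replicate_succ]
    rw [h t (by omega), pvEmitParts_nil, ih (fun j hj => h j (by omega))]

theorem pv_invariant : ∀ (M : List (List Char)) (q : List Char), pvSGood (M ++ [q]) →
    (M ++ [q]).foldl pvStep (some ([[]], [])) = some (pvStkOf (M ++ [q]) q q.length, q) := by
  intro M
  induction M using List.reverseRecOn with
  | nil =>
    intro q hg
    simp only [List.nil_append, List.foldl_cons, List.foldl_nil]
    have hlcp : pvLcp [] q = 0 := by cases q <;> rfl
    simp only [pvStep, hlcp]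
    rw [if_neg (by simp)]
    rw [pvCloseTo, dif_neg (by simp)]
    have hBr0 : ∀ j, pvBr [q] q j = [] := by
      intro j
      unfold pvBr
      simp [pvLtAt_self]
    have hTlq : pvTl [q] q q.length = [] := by
      unfold pvTl
      simp [List.drop_length]
    rw [show pvStkOf [q] q q.length
        = pvEmitParts (pvTl [q] q q.length) :: pvBelow [q] q q.length from rfl]
    rw [hTlq, pvEmitParts_nil, pvBelow_all_nil [q] q q.length (fun j _ => hBr0 j)]
    have : List.replicate q.length ([] : List (List Char)) ++ [[]]
        = [] :: List.replicate q.length [] := by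
      rw [← List.replicate_succ', List.replicate_succ]
    rw [Nat.sub_zero, this]
  | append_singleton M' p ih =>
    intro q hg
    obtain ⟨hsort, hnn, hnp⟩ := hg
    have hsubl : (M' ++ [p]).Sublist ((M' ++ [p]) ++ [q]) := List.sublist_append_left _ _
    have hg' : pvSGood (M' ++ [p]) :=
      ⟨hsort.sublist hsubl, fun x hx => hnn x (hsubl.subset hx), hnp.sublist hsubl⟩
    have hgfull : pvSGood ((M' ++ [p]) ++ [q]) := ⟨hsort, hnn, hnp⟩
    have hpN : p ∈ M' ++ [p] := by simp
    have hpq : p < q := (List.pairwise_append.mp hsort).2.2 p hpN q (by simp)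
    have hnppq : ¬ p <+: q := (List.pairwise_append.mp hnp).2.2 p hpN q (by simp)
    have hpne : p ≠ [] := hnn p (hsubl.subset hpN)
    have hl1 : pvLcp p q < p.length := by
      have hle := pvLcp_le_left p q
      rcases Nat.lt_or_ge (pvLcp p q) p.length with h | h
      · exact h
      · exact absurd ((pvLcp_eq_length_iff p q).mp (by omega)) hnppq
    have hl2 : pvLcp p q < q.length := by
      have hle : pvLcp p q ≤ q.length := by
        rw [pvLcp_comm]; exact pvLcp_le_left q p
      rcases Nat.lt_or_ge (pvLcp p q) q.length with h | h
      · exact h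
      · exfalso
        have hqp : q <+: p := (pvLcp_eq_length_iff q p).mp (by rw [← pvLcp_comm]; omega)
        rcases eq_or_ne q p with rfl | hne
        · exact lt_irrefl q hpq
        · exact lt_asymm hpq (pv_lt_of_prefix hqp hne)
    have htk : p.take (pvLcp p q) = q.take (pvLcp p q) := pvLcp_take p q
    have hgl : p[pvLcp p q] < q[pvLcp p q] := by
      have hle := pv_getElem_le (pvLcp p q) p q htk hl1 hl2 (lt_asymm hpq)
      have hne := pvLcp_get_ne p q hl1 hl2
      exact lt_of_le_of_ne hle hne
    rw [List.foldl_append, ih p hg', List.foldl_cons, List.foldl_nil]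
    have hstep : pvStep (some (pvStkOf (M' ++ [p]) p p.length, p)) q
        = some (List.replicate (q.length - pvLcp p q) []
            ++ pvCloseTo (pvLcp p q) p (pvStkOf (M' ++ [p]) p p.length), q) := by
      simp only [pvStep]
      rw [if_neg]
      rintro ⟨_, hcon⟩
      omega
    rw [hstep, pv_closeTo_stk M' p hg' (pvLcp p q) p.length (le_of_lt hl1) le_rfl]
    -- the shift: the pushed empties plus the closed stack are the new ideal stack
    congr 1
    set N := M' ++ [p] with hN
    set l := pvLcp p q with hldef
    have hq'l : q[l]? = some q[l] := List.getElem?_eq_getElem hl2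
    have hmaxN : ∀ x ∈ N, ¬ p < x := by
      intro x hx
      rcases List.mem_append.mp hx with hxM | hxp
      · exact lt_asymm ((List.pairwise_append.mp (hsort.sublist hsubl)).2.2 x hxM p (by simp))
      · have : x = p := by simpa using hxp
        subst this
        exact lt_irrefl x
    have hnpMp : ∀ x ∈ M', ¬ x <+: p := by
      have h := (List.pairwise_append.mp (hnp.sublist hsubl)).2.2
      intro x hx
      exact h x hx p (by simp)
    have hlenN : ∀ x ∈ N, x.take l = q.take l → l < x.length := by
      intro x hx ht
      by_contra hle
      push_neg at hle
      have hxq : x = p.take l := by rw [htk, ← ht, List.take_of_length_le hle]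
      have hpre : x <+: p := hxq ▸ List.take_prefix l p
      rcases List.mem_append.mp hx with hxM | hxp
      · exact hnpMp x hxM hpre
      · have : x = p := by simpa using hxp
        subst this
        have := congrArg List.length hxq
        simp [List.length_take] at this
        omega
    have hle_atN : ∀ x ∈ N, x.take l = q.take l → ∀ (hxl : l < x.length), x[l] ≤ p[l] := by
      intro x hx ht hxl
      exact pv_getElem_le l x p (ht.trans htk.symm) hxl hl1 (hmaxN x hx)
    have hBrhigh : ∀ j, l < j → j < q.length → pvBr (N ++ [q]) q j = [] := by
      intro j h1 h2
      unfold pvBr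
      rw [List.map_eq_nil_iff, List.filter_eq_nil_iff]
      intro x hx
      rcases List.mem_append.mp hx with hxN | hxq
      · simp only [Bool.and_eq_true, decide_eq_true_eq, not_and]
        intro htj
        have h11 : x.take (l + 1) = q.take (l + 1) := by
          have hc := congrArg (List.take (l + 1)) htj
          rw [List.take_take, List.take_take, Nat.min_eq_left (by omega)] at hc
          exact hc
        obtain ⟨hxl0, hxe⟩ := (pv_take_succ_iff x q l hl2).mp h11
        rw [hq'l] at hxe
        obtain ⟨hxlen, hxval⟩ := List.getElem?_eq_some_iff.mp hxe
        have hle := hle_atN x hxN hxl0 hxlen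
        rw [hxval] at hle
        intro _
        exact absurd hgl (not_lt.mpr hle)
      · have : x = q := by simpa using hxq
        subst this
        simp [pvLtAt_self]
    have hTltop : pvTl (N ++ [q]) q q.length = [] := by
      unfold pvTl
      rw [List.filter_append]
      have hNf : N.filter (fun x => decide (x.take q.length = q.take q.length)) = [] := by
        rw [List.filter_eq_nil_iff]
        intro x hx
        simp only [decide_eq_true_eq, List.take_length]
        intro hcon
        have hpre : q <+: x := by
          rw [← hcon]
          exact List.take_prefix _ x
        have hxq : x < q := (List.pairwise_append.mp hsort).2.2 x hx q (by simp)
        rcases eq_or_ne q x with rfl | hne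
        · exact lt_irrefl q hxq
        · exact lt_asymm hxq (pv_lt_of_prefix hpre hne)
      rw [hNf]
      simp [List.drop_length]
    have hBrl : pvBr (N ++ [q]) q l = pvTl N p l := by
      unfold pvBr pvTl
      rw [List.filter_append]
      have hq_part : [q].filter (fun x => decide (x.take l = q.take l) && pvLtAt x q l) = [] := by
        simp [pvLtAt_self]
      rw [hq_part, List.append_nil]
      have hNf : N.filter (fun x => decide (x.take l = q.take l) && pvLtAt x q l)
          = N.filter (fun x => decide (x.take l = p.take l)) := by
        apply List.filter_congr
        intro x hx
        by_cases hcond : x.take l = p.take l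
        · have hcond' : x.take l = q.take l := by rw [hcond, htk]
          have hxl := hlenN x hx hcond'
          have hx' : x[l]? = some x[l] := List.getElem?_eq_getElem hxl
          have hltq : x[l] < q[l] := lt_of_le_of_lt (hle_atN x hx hcond' hxl) hgl
          have hT : pvLtAt x q l = true :=
            (pvLtAt_iff x q l).mpr ⟨x[l], q[l], hx', hq'l, hltq⟩
          simp [hcond, hcond', hT, htk]
        · have hcond' : ¬ x.take l = q.take l := fun hc => hcond (by rw [hc, ← htk])
          simp [hcond, hcond']
      rw [hNf]
      symm
      apply List.filter_eq_self.mpr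
      intro t htm
      obtain ⟨x, hxf, rfl⟩ := List.mem_map.mp htm
      have hx := List.mem_of_mem_filter hxf
      have hcond : x.take l = p.take l := by
        have := (List.mem_filter.mp hxf).2
        simpa using this
      have := hlenN x hx (by rw [hcond, htk])
      simp [List.drop_eq_nil_iff]
      omega
    have hBrlow : ∀ j, j < l → pvBr (N ++ [q]) q j = pvBr N p j := by
      intro j hjl
      unfold pvBr
      rw [List.filter_append]
      have hq_part : [q].filter (fun x => decide (x.take j = q.take j) && pvLtAt x q j) = [] := by
        simp [pvLtAt_self]
      rw [hq_part, List.append_nil]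
      congr 1
      apply List.filter_congr
      intro x _
      have htkj : q.take j = p.take j := by
        have hc := congrArg (List.take j) htk
        rw [List.take_take, List.take_take, Nat.min_eq_left (by omega)] at hc
        exact hc.symm
      have hgj : q[j]? = p[j]? := by
        have h1 : p[j]? = (p.take l)[j]? := by
          rw [List.getElem?_take]
          simp [hjl]
        have h2 : q[j]? = (q.take l)[j]? := by
          rw [List.getElem?_take]
          simp [hjl]
        rw [h1, h2, htk]
      have hlt_eq : pvLtAt x q j = pvLtAt x p j := by
        unfold pvLtAt
        rw [hgj]
      rw [htkj, hlt_eq]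
    rw [show pvStkOf (N ++ [q]) q q.length
        = pvEmitParts (pvTl (N ++ [q]) q q.length) :: pvBelow (N ++ [q]) q q.length from rfl]
    rw [hTltop, pvEmitParts_nil]
    rw [pvBelow_high (N ++ [q]) q l q.length (by omega) (fun j h1 h2 => hBrhigh j h1 h2)]
    rw [show pvBelow (N ++ [q]) q (l + 1)
        = pvEmitParts (pvBr (N ++ [q]) q l) :: pvBelow (N ++ [q]) q l from rfl]
    rw [hBrl, pvBelow_congr (N ++ [q]) N q p l (fun j hj => hBrlow j hj)]
    rw [show pvStkOf N p l = pvEmitParts (pvTl N p l) :: pvBelow N p l from rfl]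
    have harith : q.length - l = (q.length - (l + 1)) + 1 := by omega
    rw [harith, List.replicate_succ, List.cons_append]

theorem pv_foldl_none (l : List (List Char)) : l.foldl pvStep none = none := by
  induction l with
  | nil => rfl
  | cons a t ih => simpa [pvStep] using ih

theorem pv_abort (R : List (List Char)) (hnn : ∀ x ∈ R, x ≠ [])
    (i : Nat) (h : i + 1 < R.length) (hpre : R[i] <+: R[i+1]) :
    R.foldl pvStep (some ([[]], [])) = none := by
  have hxR : R[i] ∈ R := List.getElem_mem (by omega)
  have hR : R = (R.take i ++ [R[i]]) ++ R[i+1] :: R.drop (i+2) := by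
    conv_lhs => rw [← List.take_append_drop i R]
    rw [List.drop_eq_getElem_cons (l := R) (i := i) (by omega),
      List.drop_eq_getElem_cons (l := R) (i := i+1) (by omega)]
    simp
  rw [hR, List.foldl_append]
  rcases hshape : (R.take i ++ [R[i]]).foldl pvStep (some ([[]], [])) with _ | st2
  · exact pv_foldl_none _
  · obtain ⟨σ, hσ⟩ : ∃ σ, st2 = (σ, R[i]) := by
      rw [List.foldl_append, List.foldl_cons, List.foldl_nil] at hshape
      rcases hprev : (R.take i).foldl pvStep (some ([[]], [])) with _ | pr
      · rw [hprev] at hshape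
        simp [pvStep] at hshape
      · rw [hprev] at hshape
        obtain ⟨stk, pv⟩ := pr
        simp only [pvStep] at hshape
        split at hshape
        · exact absurd hshape (by simp)
        · exact ⟨_, (Option.some.inj hshape).symm⟩
    subst hσ
    rw [List.foldl_cons]
    have hguard : pvStep (some (σ, R[i])) R[i+1] = none := by
      simp only [pvStep]
      rw [if_pos ⟨hnn _ hxR, (pvLcp_eq_length_iff _ _).mpr hpre⟩]
    rw [hguard]
    exact pv_foldl_none _

theorem pv_adjacent (R : List (List Char)) (hp : R.Pairwise (· < ·)) (x y : List Char)
    (hx : x ∈ R) (hy : y ∈ R) (hne : x ≠ y) (hpre : x <+: y) :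
    ∃ i, ∃ h : i + 1 < R.length, R[i] <+: R[i+1] := by
  obtain ⟨ix, hix, hgx⟩ := List.mem_iff_getElem.mp hx
  obtain ⟨iy, hiy, hgy⟩ := List.mem_iff_getElem.mp hy
  have hxy : x < y := pv_lt_of_prefix hpre hne
  have hpg := List.pairwise_iff_getElem.mp hp
  have hij : ix < iy := by
    rcases Nat.lt_trichotomy ix iy with h | h | h
    · exact h
    · exfalso
      subst h
      exact hne (hgx.symm.trans hgy)
    · exfalso
      have := hpg iy ix hiy hix h
      rw [hgx, hgy] at this
      exact lt_asymm hxy this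
  refine ⟨ix, by omega, ?_⟩
  rw [hgx]
  apply pv_between x (R[ix+1]'(by omega)) y hpre
  · have := hpg ix (ix+1) hix (by omega) (by omega)
    rw [hgx] at this
    exact this
  · rcases Nat.lt_or_ge (ix+1) iy with h | h
    · left
      have := hpg (ix+1) iy (by omega) hiy h
      rw [hgy] at this
      exact this
    · right
      have hieq : ix + 1 = iy := by omega
      subst hieq
      exact hgy

-- ===== VERDICT (by name: the statement is the Claim_ definition above) =====
theorem compact_suffixes_py_spec : Claim_equal_compact_suffixes_py := by
  intro raw _
  unfold Spec_compact_suffixes_py compact_suffixes_py compact_suffixes_py_alt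
  simp only []
  set U := PySem.Set.ofList (raw.map String.toList) with hU
  set L := PySem.List.sorted U (fun x => x) with hLdef
  have hndU : U.Nodup := PySem.Set.nodup_ofList _
  have hndUr : (U.map List.reverse).Nodup := hndU.map (fun a b h => List.reverse_injective h)
  have hrev : PySem.List.sorted (PySem.Set.ofList (raw.map (fun s => s.toList.reverse))) (fun x => x)
      = PySem.List.sorted (U.map List.reverse) (fun x => x) := by
    apply pv_canon
    · refine (PySem.List.sorted_perm _ _ _).trans ?_
      rw [List.perm_ext_iff_of_nodup hndUr (PySem.Set.nodup_ofList _)]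
      intro x
      rw [PySem.Set.mem_ofList, List.mem_map, List.mem_map]
      constructor
      · rintro ⟨u, huU, rfl⟩
        have hu2 : u ∈ raw.map String.toList := by
          rw [hU, PySem.Set.mem_ofList] at huU
          exact huU
        obtain ⟨s, hs, rfl⟩ := List.mem_map.mp hu2
        exact ⟨s, hs, rfl⟩
      · rintro ⟨s, hs, rfl⟩
        have hmem : s.toList ∈ U := by
          rw [hU, PySem.Set.mem_ofList]
          exact List.mem_map_of_mem hs
        exact ⟨s.toList, hmem, rfl⟩
    · exact pv_sorted_lt hndUr
  rw [hrev]
  set R := PySem.List.sorted (U.map List.reverse) (fun x => x) with hRdef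
  have hLperm : L.Perm U := PySem.List.sorted_perm _ _ _
  have hRperm : R.Perm (U.map List.reverse) := PySem.List.sorted_perm _ _ _
  have hndL : L.Nodup := hLperm.nodup_iff.mpr hndU
  have hlenLR : R.length = L.length := by
    rw [hRperm.length_eq, hLperm.length_eq, List.length_map]
  have hmemL : ∀ v, v ∈ L ↔ v ∈ U := fun v => hLperm.mem_iff
  have hmemR : ∀ r, r ∈ R ↔ ∃ u ∈ U, r = u.reverse := by
    intro r
    rw [hRperm.mem_iff, List.mem_map]
    constructor
    · rintro ⟨u, h1, rfl⟩; exact ⟨u, h1, rfl⟩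
    · rintro ⟨u, h1, rfl⟩; exact ⟨u, h1, rfl⟩
  by_cases h1 : PySem.List.len L ≤ 1
  · rw [if_pos h1, if_pos (Or.inl (show PySem.List.len R ≤ 1 by
      rw [PySem.List.len_eq] at h1 ⊢; rw [hlenLR]; exact h1))]
  · rw [if_neg h1]
    have hL2 : 2 ≤ L.length := by rw [PySem.List.len_eq] at h1; omega
    have hR2 : 2 ≤ R.length := by omega
    have hRne : R ≠ [] := by
      intro hc
      rw [hc] at hR2
      simp at hR2
    have hRpair : R.Pairwise (· < ·) := pv_sorted_lt hndUr
    by_cases h2 : L.any (fun v => v.isEmpty) = true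
    · rw [if_pos h2]
      have hmem0 : ([] : List Char) ∈ U := by
        obtain ⟨v, hv, hve⟩ := List.any_eq_true.mp h2
        have hv0 : v = [] := List.isEmpty_iff.mp hve
        subst hv0
        exact (hmemL []).mp hv
      have h0R : ([] : List Char) ∈ R := (hmemR []).mpr ⟨[], hmem0, rfl⟩
      have hhead : R.headI = [] := by
        cases hRc : R with
        | nil => exact absurd hRc hRne
        | cons h t =>
          rw [hRc] at h0R hRpair
          rcases List.mem_cons.mp h0R with he | hin
          · simp [he.symm]
          · exfalso
            exact List.not_lex_nil ((List.pairwise_cons.mp hRpair).1 [] hin)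
      rw [if_pos (Or.inr hhead)]
    · rw [if_neg h2]
      have hnoemp : ([] : List Char) ∉ U := by
        intro hc
        apply h2
        rw [List.any_eq_true]
        exact ⟨[], (hmemL []).mpr hc, rfl⟩
      have hRnn : ∀ r ∈ R, r ≠ [] := by
        intro r hr
        obtain ⟨u, hu, rfl⟩ := (hmemR r).mp hr
        simp only [ne_eq, List.reverse_eq_nil_iff]
        rintro rfl
        exact hnoemp hu
      have hBguard : ¬(PySem.List.len R ≤ 1 ∨ R.headI = []) := by
        rintro (hc | hc)
        · rw [PySem.List.len_eq] at hc
          omega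
        · cases hRc : R with
          | nil => exact hRne hRc
          | cons h t =>
            rw [hRc] at hc
            refine hRnn h ?_ (by simpa using hc)
            rw [hRc]
            exact List.mem_cons_self
      rw [if_neg hBguard]
      have hpairs : (∃ x ∈ L, ∃ y ∈ L, x ≠ y ∧ x <:+ y)
          ↔ (∃ a ∈ R, ∃ b ∈ R, a ≠ b ∧ a <+: b) := by
        constructor
        · rintro ⟨x, hxL, y, hyL, hxy, hsuf⟩
          exact ⟨x.reverse, (hmemR _).mpr ⟨x, (hmemL x).mp hxL, rfl⟩,
            y.reverse, (hmemR _).mpr ⟨y, (hmemL y).mp hyL, rfl⟩,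
            fun hc => hxy (List.reverse_injective hc), List.reverse_prefix.mpr hsuf⟩
        · rintro ⟨a, haR, b, hbR, hab, hpre⟩
          obtain ⟨u, hu, rfl⟩ := (hmemR a).mp haR
          obtain ⟨v, hv, rfl⟩ := (hmemR b).mp hbR
          exact ⟨u, (hmemL u).mpr hu, v, (hmemL v).mpr hv,
            fun hc => hab (by rw [hc]), List.reverse_prefix.mp hpre⟩
      have hiffA := pv_hasSuffix_iff L hndL
      by_cases h3 : pvHasSuffixRelations L = true
      · rw [if_pos h3]
        obtain ⟨a, haR, b, hbR, hab, hpre⟩ := hpairs.mp (hiffA.mp h3)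
        obtain ⟨i, hi, hadj⟩ := pv_adjacent R hRpair a b haR hbR hab hpre
        rw [pv_abort R hRnn i hi hadj]
      · rw [if_neg h3]
        have hnopair : ¬ ∃ a ∈ R, ∃ b ∈ R, a ≠ b ∧ a <+: b :=
          fun hc => h3 (hiffA.mpr (hpairs.mpr hc))
        have hSG : pvSGood R := by
          refine ⟨hRpair, hRnn, ?_⟩
          refine List.Pairwise.imp_of_mem ?_ hRpair
          intro a b ha hb hlt hpre
          exact hnopair ⟨a, ha, b, hb, ne_of_lt hlt, hpre⟩
        obtain ⟨M0, q0, hRMq⟩ : ∃ M0 q0, R = M0 ++ [q0] :=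
          ⟨R.dropLast, R.getLast hRne, (List.dropLast_append_getLast hRne).symm⟩
        have hfold := pv_invariant M0 q0 (by rw [← hRMq]; exact hSG)
        rw [← hRMq] at hfold
        have hclose := pv_closeTo_stk M0 q0 (by rw [← hRMq]; exact hSG) 0 q0.length
          (Nat.zero_le _) le_rfl
        rw [← hRMq] at hclose
        have hgoodU : pvGood U := by
          refine ⟨hndU, fun v hv hc => hnoemp (hc ▸ hv), ?_⟩
          intro x hxU y hyU hxy hsuf
          exact h3 (hiffA.mpr ⟨x, (hmemL x).mpr hxU, y, (hmemL y).mpr hyU, hxy, hsuf⟩)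
        have hmain := pv_main U hgoodU
        rw [← hLdef, ← hRdef] at hmain
        rw [hfold, hmain]
        show some (String.ofList (['('] ++ pvEmit R ++ [')', '$']))
          = some (String.ofList (['('] ++ pvRender ((pvCloseTo 0 q0 (pvStkOf R q0 q0.length)).headI)
              ++ [')', '$']))
        have hfinal : pvRender ((pvCloseTo 0 q0 (pvStkOf R q0 q0.length)).headI) = pvEmit R := by
          rw [hclose]
          rw [show pvStkOf R q0 0 = [pvEmitParts (pvTl R q0 0)] from rfl]
          rw [show ([pvEmitParts (pvTl R q0 0)] : List (List (List Char))).headI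
              = pvEmitParts (pvTl R q0 0) from rfl]
          have hTl0 : pvTl R q0 0 = R := by
            unfold pvTl
            have e1 : R.filter (fun x => decide (x.take 0 = q0.take 0)) = R :=
              List.filter_eq_self.mpr (fun x _ => by simp)
            rw [e1]
            have e2 : R.map (fun x => x.drop 0) = R := by
              simp
            rw [e2]
            exact List.filter_eq_self.mpr (fun x hx => by simpa using hRnn x hx)
          rw [hTl0, pv_render_emit R hRnn, if_neg hRne]
        rw [hfinal]
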